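/- GENERATED by mk_final_copies.py from the proof of the farm's unit `stb_vorbis_open_memory` (farm:stb_vorbis_open_memory.2: Lemmas.lean) as the
   re-elaboration sweep compiled it — do not edit. -/
import Asan.CheckWalk
import Vorbis.Spec.TopCheck
import Vorbis.Spec.TopIface
import Vorbis.Spec.StartDecoderB
import Vorbis.Spec.Units.stb_vorbis_open_memory

open X86 X86.User Asan Vorbis Vorbis.Spec

namespace Vorbis.Spec.stb_vorbis_open_memory

set_option maxRecDepth 10000
set_option maxHeartbeats 4000000

theorem om_shaddr (sp : Word) (c : Word) (k : Nat) (h1 : 0x700000 + 2032 ≤ sp.toNat) (h2 : sp.toNat ≤ 0x800000)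
    (hk : k < 256) (hc : c.toNat = 12582912 + k) :
    (sp - 2024) >>> 3 + c = shadowAddr ((sp.toNat - 2024) / 8 + k) := by
  apply UInt64.toNat_inj.mp
  rw [shadowAddr_toNat _ (by omega)]
  u_omega

/-- A store into the own stack keeps the shadow layer. -/
theorem om_stack_store {others : List Obj} {frames : List (Nat × FrameLayout)} {top : Nat} {m : Mem}
    (h : ShadowInv others frames top m) (sp : Word) (d : Word) (v : Nat) (hd : d.toNat ≤ sp.toNat) (h2 : sp.toNat ≤ 0x800000) (hd8 : 8 ≤ d.toNat) :
    ShadowInv others frames top (m.writeLE (sp - d) 8 v) := by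
  refine h.writeLE _ 8 v ?_ ?_
  · u_omega
  · left
    u_omega

/-- The memory after the prologue's six inline shadow stores is `storesMem` of the frame's prologue. -/
theorem om_prologue_mem (m : Mem) (sp : Word) (h1 : 0x700000 + 2032 ≤ sp.toNat) (h2 : sp.toNat ≤ 0x800000) :
    ((((((m.writeLE ((sp - 2024) >>> 3 + 12582912) 4 4059165169).writeLE
                          ((sp - 2024) >>> 3 + 12582916) 4 61937).writeLE
                      ((sp - 2024) >>> 3 + 12583144) 4 4092851187).writeLE
                  ((sp - 2024) >>> 3 + 12583148) 4 4092851187).writeLE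
              ((sp - 2024) >>> 3 + 12583152) 4 4092851187).writeLE
          ((sp - 2024) >>> 3 + 12583156) 4 4092851187) =
      storesMem m ((sp.toNat - 2024) / 8) Vorbis.Frames.stb_vorbis_open_memory.prologue := by
  rw [om_shaddr sp 12582912 0 h1 h2 (by decide) (by decide), om_shaddr sp 12582916 4 h1 h2 (by decide) (by decide),
    om_shaddr sp 12583144 232 h1 h2 (by decide) (by decide), om_shaddr sp 12583148 236 h1 h2 (by decide) (by decide),
    om_shaddr sp 12583152 240 h1 h2 (by decide) (by decide), om_shaddr sp 12583156 244 h1 h2 (by decide) (by decide)]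
  rfl

/-- **After the prologue** -/
theorem om_prologue {others : List Obj} {frames : List (Nat × FrameLayout)} {sp : Word} {m : Mem}
    (h : ShadowInv others frames (sp.toNat + 8) m) (h8 : sp.toNat % 8 = 0) (h1 : 0x700000 + 2032 ≤ sp.toNat)
    (h2 : sp.toNat ≤ 0x800000) (v1 v2 v3 v4 v5 v6 v7 : Nat) :
    ShadowInv others ((sp.toNat - 2024, Vorbis.Frames.stb_vorbis_open_memory) :: frames) (sp.toNat - 2024)
      (((((((((((((m.writeLE (sp - 8) 8 v1).writeLE (sp - 16) 8 v2).writeLE (sp - 24) 8 v3).writeLE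
                                              (sp - 32) 8 v4).writeLE
                                          (sp - 2024) 8 v5).writeLE
                                      (sp - 2016) 8 v6).writeLE
                                  (sp - 2008) 8 v7).writeLE
                              ((sp - 2024) >>> 3 + 12582912) 4 4059165169).writeLE
                          ((sp - 2024) >>> 3 + 12582916) 4 61937).writeLE
                      ((sp - 2024) >>> 3 + 12583144) 4 4092851187).writeLE
                  ((sp - 2024) >>> 3 + 12583148) 4 4092851187).writeLE
              ((sp - 2024) >>> 3 + 12583152) 4 4092851187).writeLE
          ((sp - 2024) >>> 3 + 12583156) 4 4092851187) := by
  rw [om_prologue_mem _ sp h1 h2]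
  have e : Vorbis.Frames.stb_vorbis_open_memory.raOff = 2024 := rfl
  have h' := om_stack_store (om_stack_store (om_stack_store (om_stack_store (om_stack_store (om_stack_store (om_stack_store h
    sp 8 v1 (by u_omega) h2 (by decide)) sp 16 v2 (by u_omega) h2 (by decide)) sp 24 v3 (by u_omega) h2 (by decide))
    sp 32 v4 (by u_omega) h2 (by decide)) sp 2024 v5 (by u_omega) h2 (by decide)) sp 2016 v6 (by u_omega) h2 (by decide))
    sp 2008 v7 (by u_omega) h2 (by decide)
  have := h'.prologue_ra (top' := sp.toNat - 2024) Vorbis.Frames.stb_vorbis_open_memory_ok h8 (by rw [e]; omega) (by omega) (by omega)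
  rw [e] at this
  exact this

/-- Every live object stays one when the own protected frame is pushed in front of the frame list. -/
theorem om_sub_frames (others : List Obj) (frames : List (Nat × FrameLayout)) (base : Nat) (F : FrameLayout) :
    ∀ o, o ∈ stackObjs frames ++ others → o ∈ stackObjs ((base, F) :: frames) ++ others := by
  intro o ho
  rw [stackObjs_cons, List.append_assoc]
  exact List.mem_append_right _ ho

/-- The stack object `p` (1808 bytes at `base + 48`) is a live object of the frame list with the own frame in front. -/
theorem om_p_live (others : List Obj) (frames : List (Nat × FrameLayout)) (sp : Nat) (h : 2024 ≤ sp) :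
    LiveIn others ((sp - 2024, Vorbis.Frames.stb_vorbis_open_memory) :: frames) (sp - 1976) 1808 := by
  refine ⟨⟨sp - 2024 + 48, 1808, .stack⟩, ?_, ?_, ?_⟩
  · rw [stackObjs_cons, List.append_assoc]
    apply List.mem_append_left
    simp only [FrameLayout.objsAt, Vorbis.Frames.stb_vorbis_open_memory, List.map_cons, List.map_nil, List.mem_singleton]
  · simp only []
    omega
  · simp only []
    omega

/-- `om_prologue` with the six shadow addresses named (the form the walk uses: `u_omega` and the frame tactics do not see
through `(rsp - 2024) >>> 3 + c` inside a disjunction, so the walk is given `(rsp - 2024) >>> 3 + c = a` as rewrite rules). -/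
theorem om_prologue_a {others : List Obj} {frames : List (Nat × FrameLayout)} {sp a1 a2 a3 a4 a5 a6 : Word} {m : Mem}
    (h1' : (sp - 2024) >>> 3 + 12582912 = a1) (h2' : (sp - 2024) >>> 3 + 12582916 = a2)
    (h3' : (sp - 2024) >>> 3 + 12583144 = a3) (h4' : (sp - 2024) >>> 3 + 12583148 = a4)
    (h5' : (sp - 2024) >>> 3 + 12583152 = a5) (h6' : (sp - 2024) >>> 3 + 12583156 = a6)
    (h : ShadowInv others frames (sp.toNat + 8) m) (h8 : sp.toNat % 8 = 0) (h1 : 0x700000 + 2032 ≤ sp.toNat)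
    (h2 : sp.toNat ≤ 0x800000) (v1 v2 v3 v4 v5 v6 v7 : Nat) :
    ShadowInv others ((sp.toNat - 2024, Vorbis.Frames.stb_vorbis_open_memory) :: frames) (sp.toNat - 2024)
      (((((((((((((m.writeLE (sp - 8) 8 v1).writeLE (sp - 16) 8 v2).writeLE (sp - 24) 8 v3).writeLE
                                              (sp - 32) 8 v4).writeLE
                                          (sp - 2024) 8 v5).writeLE
                                      (sp - 2016) 8 v6).writeLE
                                  (sp - 2008) 8 v7).writeLE
                              a1 4 4059165169).writeLE
                          a2 4 61937).writeLE
                      a3 4 4092851187).writeLE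
                  a4 4 4092851187).writeLE
              a5 4 4092851187).writeLE
          a6 4 4092851187) := by
  subst h1' h2' h3' h4' h5' h6'
  exact om_prologue h h8 h1 h2 v1 v2 v3 v4 v5 v6 v7

/-- The value of a named shadow address. -/
theorem om_shaddr_toNat (sp c a : Word) (k : Nat) (h : (sp - 2024) >>> 3 + c = a) (h1 : 0x700000 + 2032 ≤ sp.toNat)
    (h2 : sp.toNat ≤ 0x800000) (hk : k < 256) (hc : c.toNat = 12582912 + k) :
    a.toNat = 12582912 + k + (sp.toNat - 2024) / 8 := by
  rw [← h]
  u_omega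

/-- The memory after the epilogue's three inline shadow stores is `storesMem` of the frame's epilogue. -/
theorem om_epilogue_mem (m : Mem) (sp a1 a3 a5 : Word) (h1' : (sp - 2024) >>> 3 + 12582912 = a1)
    (h3' : (sp - 2024) >>> 3 + 12583144 = a3) (h5' : (sp - 2024) >>> 3 + 12583152 = a5)
    (h1 : 0x700000 + 2032 ≤ sp.toNat) (h2 : sp.toNat ≤ 0x800000) :
    (((m.writeLE a1 8 0).writeLE a3 8 0).writeLE a5 8 0) =
      storesMem m ((sp.toNat - 2024) / 8) Vorbis.Frames.stb_vorbis_open_memory.epilogue := by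
  subst h1' h3' h5'
  rw [om_shaddr sp 12582912 0 h1 h2 (by decide) (by decide), om_shaddr sp 12583144 232 h1 h2 (by decide) (by decide),
    om_shaddr sp 12583152 240 h1 h2 (by decide) (by decide)]
  rfl

/-- **After the epilogue's three shadow stores** (0x119bb9 – 0x119bcf): the own frame is popped, the clean stack ends at the
caller's stack pointer again. -/
theorem om_epilogue {others : List Obj} {frames : List (Nat × FrameLayout)} {sp a1 a3 a5 : Word} {m : Mem} {top' : Nat}
    (h1' : (sp - 2024) >>> 3 + 12582912 = a1) (h3' : (sp - 2024) >>> 3 + 12583144 = a3)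
    (h5' : (sp - 2024) >>> 3 + 12583152 = a5)
    (h : ShadowInv others ((sp.toNat - 2024, Vorbis.Frames.stb_vorbis_open_memory) :: frames) top' m)
    (h8 : sp.toNat % 8 = 0) (h1 : 0x700000 + 2032 ≤ sp.toNat) (h2 : sp.toNat + 8 ≤ 0x800000)
    (hfr : ∀ bF, bF ∈ frames → sp.toNat + 8 ≤ bF.1) :
    ShadowInv others frames (sp.toNat + 8) (((m.writeLE a1 8 0).writeLE a3 8 0).writeLE a5 8 0) := by
  rw [om_epilogue_mem m sp a1 a3 a5 h1' h3' h5' h1 (by omega)]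
  have e : Vorbis.Frames.stb_vorbis_open_memory.raOff = 2024 := rfl
  have h' : ShadowInv others ((sp.toNat - Vorbis.Frames.stb_vorbis_open_memory.raOff, Vorbis.Frames.stb_vorbis_open_memory) :: frames) top' m := by
    rw [e]
    exact h
  have := h'.epilogue_ra h8 h2 hfr
  rw [e] at this
  exact this

/-- The fixed objects stay live when the own protected frame is pushed. -/
theorem om_fixedLive_push {len : Nat} {others : List Obj} {frames : List (Nat × FrameLayout)} (base : Nat) (F : FrameLayout)
    (h : Top.FixedLive len others frames) : Top.FixedLive len others ((base, F) :: frames) := by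
  have hsub := om_sub_frames others frames base F
  refine ⟨?_, fun hl => (h.inp hl).mono hsub, h.out.mono hsub, h.globals⟩
  refine BlkLive.mono h.blk ?_
  intro x hx
  obtain ⟨o, ho, hb⟩ := hx
  exact ⟨o, hsub o ho, hb⟩

/-- **Point P3** (the precondition of start_decoder) from vorbis_init's postcondition (`H0`, the fresh arena, in the memory
`mem0`) and the five stream stores (the memory `mem` differs from `mem0` inside `[p + 48, p + 80)` only, as far as `*p` is
concerned, and holds the three pointers). -/
theorem om_p3 {len p : Nat} {others : List Obj} {frames : List (Nat × FrameLayout)} {mem0 mem : Mem}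
    (hA : ArenaOK ⟨0x800000, 0x400000, 0, 0x400000, [], []⟩ others mem0 p) (h0 : H0 mem0 p)
    (hcov : Covers (Asan.Live (stackObjs frames ++ others)) mem)
    (hfix : Top.FixedLive len others frames) (hp : LiveIn others frames p Off.sizeof.stb_vorbis) (hlen : len ≤ 0x1FF000)
    (hstack : 0x700000 ≤ p ∧ p + Off.sizeof.stb_vorbis ≤ 0x800000) (hp8 : p % 8 = 0)
    (hz0 : Mem.EqOn p (p + 48) mem0 mem) (hz1 : Mem.EqOn (p + 80) (p + 1808) mem0 mem)
    (e1 : stb_vorbis.stream mem p = IN) (e2 : stb_vorbis.stream_start mem p = IN)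
    (e3 : stb_vorbis.stream_end mem p = IN + len) :
    Real.P3 len (⟨0x800000, 0x400000, 0, 0x400000, [], []⟩, others)
      (StartDecoder.blk len p (⟨0x800000, 0x400000, 0, 0x400000, [], []⟩, others))
      (Asan.Live (stackObjs frames ++ others)) mem p := by
  simp only [voff] at hstack
  have hhand : StartDecoder.HandOK len p frames (⟨0x800000, 0x400000, 0, 0x400000, [], []⟩, others) :=
    TopCheck.handOK_of_fixedLive hfix hlen rfl hp (by simp only [voff]; omega)
  have hA' : ArenaOK ⟨0x800000, 0x400000, 0, 0x400000, [], []⟩ others mem p := by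
    refine hA.frame (by simp only [voff]; omega) ?_
    simp only [voff]
    exact hz1.mono (by omega) (by omega)
  have h0s := h0.toH0s
  have hs : H0s mem p := by
    obtain ⟨z0, z0', z1, z2, z3, ht, hc⟩ := h0s
    simp only [voff] at z0 z0' z1 z2 z3
    simp only [vacc, voff] at ht hc
    refine ⟨?_, ?_, ?_, ?_, ?_, ?_, ?_⟩
    · simp only [voff]
      exact z0.frame (hz0.mono (by omega) (by omega)) (by omega)
    · simp only [voff]
      exact z0'.frame (hz1.mono (by omega) (by omega)) (by omega)
    · simp only [voff]
      exact z1.frame (hz1.mono (by omega) (by omega)) (by omega)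
    · simp only [voff]
      exact z2.frame (hz1.mono (by omega) (by omega)) (by omega)
    · simp only [voff]
      exact z3.frame (hz1.mono (by omega) (by omega)) (by omega)
    · simp only [vacc, voff]
      rw [hz1.i32 _ (by omega) (by omega) (by omega), hz1.i32 _ (by omega) (by omega) (by omega)]
      exact ht
    · simp only [vacc, voff]
      rw [hz1.i32 _ (by omega) (by omega) (by omega)]
      exact hc
  have hok : BlkOK (StartDecoder.blk len p (⟨0x800000, 0x400000, 0, 0x400000, [], []⟩, others)) :=
    hhand.blk_ok hA' hlen (by simp only [voff]; omega)
  have hlive : BlkLive (StartDecoder.blk len p (⟨0x800000, 0x400000, 0, 0x400000, [], []⟩, others))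
      (Asan.Live (stackObjs frames ++ others)) := by
    intro B hB
    rcases hB with hs | hx
    · obtain ⟨o, ho, _⟩ := hs
      simp only [List.not_mem_nil] at ho
    · rcases List.mem_cons.mp hx with rfl | hm
      · exact (LiveBytes.of_liveIn hp).inLive
      · exact hfix.blk _ hm
  have hO : StartDecoder.blk len p (⟨0x800000, 0x400000, 0, 0x400000, [], []⟩, others) (objBlock p) :=
    runBlk_extra List.mem_cons_self
  have hI : StartDecoder.blk len p (⟨0x800000, 0x400000, 0, 0x400000, [], []⟩, others) (inBlock len) :=
    runBlk_extra (List.mem_cons_of_mem _ List.mem_cons_self)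
  refine ⟨⟨hcov, hok, hlive⟩, hs, hA', ⟨rfl, rfl⟩, ?_, ?_⟩
  · refine Bits.init hO hp8 (by simp only [voff]; omega) hI hlen e2 e3 e1 ?_ ?_ ?_
    · simp only [vacc, voff]
      exact hs.z2.i32 1488 (by simp only [voff]; omega) (by simp only [voff]; omega)
    · simp only [vacc, voff]
      exact hs.z2.i32 1752 (by simp only [voff]; omega) (by simp only [voff]; omega)
    · simp only [vacc, voff]
      exact hs.z2.i32 1768 (by simp only [voff]; omega) (by simp only [voff]; omega)
  · rw [e1, e2]

/-- The `int` argument `len` as the walker's two forms of it: the low half of `rsi`, and `data + (long) len`. -/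
theorem om_len (w : Word) (len : Nat) (h : s32 w = (len : Int)) (hl : len ≤ 0x1FF000) :
    (Word.part .w32 w).toNat = len ∧
      (Word.ofBV (BitVec.signExtend 64 (Word.part .w32 w)) + 2097152).toNat = IN + len := by
  rw [s32_eq_argInt, argInt_def] at h
  have h1 : w.toNat % 2 ^ 32 = len := by
    unfold sint32 at h
    split at h <;> omega
  have h2 : (Word.part .w32 w).toNat = len := by
    rw [Vorbis.toNat_part32]
    exact h1
  refine ⟨h2, ?_⟩
  rw [UInt64.toNat_add, toNat_sext32 _ (by omega), h2]
  have e : (2097152 : Word).toNat = 2097152 := by decide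
  rw [e]
  unfold IN
  omega

/-- SH7 (`Consts`) over the function's footprint: the two tables lie outside every window. -/
theorem om_consts {mem mem' : Mem} {sp e : Nat} (h : Consts mem)
    (hs : Mem.SameExcept [⟨sp - 6208, sp⟩, ⟨0x800000, 0xC00000⟩, ⟨0xC00000, 0xE00000⟩, ⟨0x121c00, 0x122000⟩, ⟨e, e + 4⟩]
      mem mem') (hsp : 0x700000 + 6208 ≤ sp) (he : 0x700000 ≤ e) : Consts mem' := by
  refine h.kept ?_ ?_
  · refine Block.Kept.of_sameExcept hs ?_ (by decide)
    intro w hw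
    simp only [List.mem_cons, List.not_mem_nil, or_false] at hw
    rcases hw with rfl | rfl | rfl | rfl | rfl <;> simp only [Vorbis.Globals.log2_4] <;> omega
  · refine Block.Kept.of_sameExcept hs ?_ (by decide)
    intro w hw
    simp only [List.mem_cons, List.not_mem_nil, or_false] at hw
    rcases hw with rfl | rfl | rfl | rfl | rfl <;> simp only [Vorbis.Globals.range_list] <;> omega

/-- A stack object of a caller's frame is a live object under any list of `others`, also with the own frame pushed. -/
theorem om_stackObj_live {others others' : List Obj} {frames : List (Nat × FrameLayout)} {base a n top : Nat} {F : FrameLayout}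
    {mem : Mem} (h : StackObj others frames a n) (hinv : ShadowInv others frames top mem) (hn : 0 < n) :
    LiveIn others' ((base, F) :: frames) a n := by
  obtain ⟨⟨o, ho, h1, h2⟩, hlo, hhi⟩ := h
  rcases List.mem_append.mp ho with hs | hoth
  · refine ⟨o, ?_, h1, h2⟩
    rw [stackObjs_cons, List.append_assoc]
    exact List.mem_append_right _ (List.mem_append_left _ hs)
  · have := hinv.off o hoth
    unfold OffStack at this
    omega

/-- Where the blocks of start_decoder's block predicate are: `*p` itself, or off the stack region (an arena block of the
harness's arena, a fixed object). -/
theorem om_blk_off {len p : Nat} {A : Arena × List Obj} (hB : 0x800000 ≤ A.1.B) (hlen : len ≤ 0x1FF000) {B : Block}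
    (h : StartDecoder.blk len p A B) : B = objBlock p ∨ B.base + B.size ≤ 0x700000 ∨ 0x800000 ≤ B.base := by
  rcases h with hs | hx
  · obtain ⟨o, _, hb⟩ := hs
    right
    right
    omega
  · rcases List.mem_cons.mp hx with rfl | hm
    · exact Or.inl rfl
    · exact Or.inr (fixed_off_stack len hlen B hm)

/-- **Stores above the frame object `p` and into the return-address slot below it keep every allocated block**
(start_decoder's block predicate): the two windows are the slot `[sp − 2032, sp − 2024)` and `*error` (a caller's stack
object, at or above `sp + 8`). -/
theorem om_allKept {len : Nat} {A : Arena × List Obj} {sp e : Nat} {mem mem' : Mem}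
    (hok : BlkOK (StartDecoder.blk len (sp - 1976) A)) (hB : 0x800000 ≤ A.1.B) (hlen : len ≤ 0x1FF000)
    (hsp : 0x700000 + 6208 ≤ sp) (he : sp + 8 ≤ e ∧ e + 4 ≤ 0x800000)
    (hs : Mem.SameExcept [⟨sp - 2032, sp - 2024⟩, ⟨e, e + 4⟩] mem mem') :
    AllKept (StartDecoder.blk len (sp - 1976) A) mem mem' := by
  refine AllKept.of_sameExcept hok hs ?_
  intro B hBk w hw
  simp only [List.mem_cons, List.not_mem_nil, or_false] at hw
  rcases om_blk_off hB hlen hBk with rfl | hoff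
  · rcases hw with rfl | rfl <;> simp only [vblock, voff] <;> omega
  · rcases hw with rfl | rfl <;> simp only [] <;> omega

/-- **What every cut point after the prologue knows of the machine state** `s` (`u` = the state at the function's entry, `ret` the
return address, `pc` the cut): the steady stack pointer, `rbx = base >> 3`, `r12 = error`, the callee-saved registers that are
never written, the four saved registers and the return address in their slots, the code span, DF / MXCSR, and the function's
footprint so far. -/
structure OmMid (u₀ u : State) (ret pc : Word) (s : State) : Prop where
  rip : s.rip = pc
  rsp : s.reg .rsp = u.reg .rsp - 2024
  rbx : s.reg .rbx = (u.reg .rsp - 2024) >>> 3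
  r12 : s.reg .r12 = u.reg .rdx
  r14 : s.reg .r14 = u.reg .r14
  r15 : s.reg .r15 = u.reg .r15
  k0 : UInt64.ofNat (s.mem.readLE (u.reg .rsp) 8) = ret
  k1 : UInt64.ofNat (s.mem.readLE (u.reg .rsp - 8) 8) = u.reg .r13
  k2 : UInt64.ofNat (s.mem.readLE (u.reg .rsp - 16) 8) = u.reg .r12
  k3 : UInt64.ofNat (s.mem.readLE (u.reg .rsp - 24) 8) = u.reg .rbp
  k4 : UInt64.ofNat (s.mem.readLE (u.reg .rsp - 32) 8) = u.reg .rbx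
  code : Mem.EqOn Vorbis.L.textLo Vorbis.L.textHi u₀.mem s.mem
  inv : abiInv s
  same : Mem.SameExcept [⟨(u.reg .rsp).toNat - 6208, (u.reg .rsp).toNat⟩, ⟨0x800000, 0xC00000⟩, ⟨0xC00000, 0xE00000⟩,
    ⟨0x121c00, 0x122000⟩, ⟨(u.reg .rdx).toNat, (u.reg .rdx).toNat + 4⟩] u.mem s.mem

/-- **What the state after start_decoder's return (cut2, 0x119b07) knows besides `OmMid`**: start_decoder's postcondition for
the entry arena of the harness and the frame list with the own frame in front; SH7. `p = rsp_entry − 1976`. -/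
def OmAfterSd (others : List Obj) (frames : List (Nat × FrameLayout)) (len : Nat) (u s : State) : Prop :=
  Consts s.mem ∧
  ∃ A : Arena × List Obj,
    (⟨0x800000, 0x400000, 0, 0x400000, [], []⟩ : Arena).Extends A.1 ∧
    ShadowInv A.2 (((u.reg .rsp).toNat - 2024, Vorbis.Frames.stb_vorbis_open_memory) :: frames) ((u.reg .rsp).toNat - 2024) s.mem ∧
    (∀ o, o ∈ A.2 → L.textHi ≤ o.base) ∧
    StartDecoder.HandOK len ((u.reg .rsp).toNat - 1976)
      (((u.reg .rsp).toNat - 2024, Vorbis.Frames.stb_vorbis_open_memory) :: frames) A ∧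
    (((s.reg .rax).toNat % 2 ^ 32 = 1 ∧
        StartDecoder.Done len ((u.reg .rsp).toNat - 1976)
          (Asan.Live (stackObjs (((u.reg .rsp).toNat - 2024, Vorbis.Frames.stb_vorbis_open_memory) :: frames) ++ A.2)) A s.mem) ∨
     ((s.reg .rax).toNat % 2 ^ 32 = 0 ∧
        StartDecoder.Failed len ((u.reg .rsp).toNat - 1976)
          (Asan.Live (stackObjs (((u.reg .rsp).toNat - 2024, Vorbis.Frames.stb_vorbis_open_memory) :: frames) ++ A.2)) A s.mem))

/-- **Stage 2: from vorbis_init's return (cut1, 0x119ac9) to start_decoder's return (cut2, 0x119b07)**: FIX 19's test (not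
taken: B = 800000H), the five stream stores, `call start_decoder` with point P3. `hnext` is the rest of the function. -/
theorem om_stage2 (Lay : Layout) (hLay : Lay.hi = 0x1000000) (μ : Microarch) (hμ : UserX.MicroOK μ) (u₀ : State)
    (hcode : HasCodeNat Lay u₀ Vorbis.L.stb_vorbis_open_memory.entry Vorbis.Code.code_stb_vorbis_open_memory.nat Vorbis.L.stb_vorbis_open_memory.size)
    (h_sd : ∀ (len : Nat) (A0 : Arena × List Obj) (frames : List (Nat × FrameLayout)), Calls Lay μ Vorbis.WayInv (Vorbis.conv u₀) Vorbis.L.start_decoder.entry (Vorbis.Spec.start_decoder.spec len A0 frames))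
    (others : List Obj) (frames : List (Nat × FrameLayout)) (len : Nat) (u : State) (ret : Word)
    (he : AtEntry (conv u₀) Vorbis.L.stb_vorbis_open_memory.entry (Vorbis.Spec.stb_vorbis_open_memory.spec others frames len).frame ret u)
    (hpre : (Vorbis.Spec.stb_vorbis_open_memory.spec others frames len).pre u)
    (Q : State → Prop)
    (hnext : ∀ s, OmMid u₀ u ret Vorbis.L.stb_vorbis_open_memory.cut2 s → OmAfterSd others frames len u s → ReachVia Lay μ WayInv s Q)
    (s : State) (hm : OmMid u₀ u ret Vorbis.L.stb_vorbis_open_memory.cut1 s)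
    (c_r13 : s.reg .r13 = Word.ofBV (Word.part Width.w32 (u.reg .rsi))) (c_rbp : s.reg .rbp = 2097152)
    (hinv : ShadowInv others (((u.reg .rsp).toNat - 2024, Vorbis.Frames.stb_vorbis_open_memory) :: frames)
      ((u.reg .rsp).toNat - 2024) s.mem)
    (h0 : H0 s.mem ((u.reg .rsp).toNat - 1976))
    (harena : ArenaOK ⟨0x800000, 0x400000, 0, 0x400000, [], []⟩ others s.mem ((u.reg .rsp).toNat - 1976)) :
    ReachVia Lay μ WayInv s Q := by
  v_entry he
  obtain ⟨hsh, hrdi, hrsi, hlen, herr, halloc, hapart, hB, hL, hfix, hfree, hconsts⟩ := hpre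
  have hwe : (u.reg .rsp).toNat + 8 ≤ (u.reg .rdx).toNat ∧ (u.reg .rdx).toNat + 4 ≤ 0x800000 := by
    have := herr.1.above hsh.inv
    have := herr.2
    omega
  have hal7 : (Word.part Width.w8 (8388608 : Word) &&& 7#8).toNat = 0 := by decide
  have hsd := h_sd len (⟨0x800000, 0x400000, 0, 0x400000, [], []⟩, others)
    (((u.reg .rsp).toNat - 2024, Vorbis.Frames.stb_vorbis_open_memory) :: frames)
  -- the present state
  have w_rip := hm.rip
  have c_rsp : s.reg .rsp = u.reg .rsp - 2024 := hm.rsp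
  have c_rbx : s.reg .rbx = (u.reg .rsp - 2024) >>> 3 := hm.rbx
  have c_r12 : s.reg .r12 = u.reg .rdx := hm.r12
  have w_kept : RegsKept [.rsp] s s := RegsKept.refl _ _
  have w_eq : Mem.EqOn Vorbis.L.textLo Vorbis.L.textHi u₀.mem s.mem := hm.code
  have hdf : s.flags .df = false := (show abiInv _ from hm.inv).1
  have hmx : s.mxcsr &&& 0x1F80 = 0x1F80 := (show abiInv _ from hm.inv).2
  have hsse := Vorbis.sseOK_of_abiInv hm.inv
  -- FIX 19's load of `p.alloc.alloc_buffer`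
  have hbuf : s.mem.readLE (u.reg .rsp - 1864) 8 = 0x800000 := by
    have := harena.AR5.buffer
    simp only [vacc, voff] at this
    unfold Mem.u64 at this
    have ea : addr ((u.reg .rsp).toNat - 1976 + 112) = u.reg .rsp - 1864 := by
      apply UInt64.toNat_inj.mp
      rw [toNat_addr _ (by omega)]
      u_omega
    rw [ea] at this
    exact this
  u_walk hcode [hμ.vendor] until [Vorbis.L.stb_vorbis_open_memory.cut2] span [Vorbis.L.textLo, Vorbis.L.textHi] side (v_side)
  · v_inv
  · -- start_decoder's precondition: point P3
    obtain ⟨hlen32, hend⟩ := om_len _ _ hrsi hlen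
    have hend' : (Word.ofBV (BitVec.signExtend 64 (Word.part .w32 (u.reg .rsi))) + 2097152).toNat = 2097152 + len := hend
    have hinvC : ShadowInv others (((u.reg .rsp).toNat - 2024, Vorbis.Frames.stb_vorbis_open_memory) :: frames)
        ((s_119b02.reg .rsp).toNat + 8) s_119b02.mem := by
      have e : (s_119b02.reg .rsp).toNat + 8 = (u.reg .rsp).toNat - 2024 := by
        rw [w_rsp]
        u_omega
      rw [e, w_mem]
      refine om_stack_store ?_ (u.reg .rsp) 2032 _ (by u_omega) (by omega) (by decide)
      refine ShadowInv.writeLE ?_ _ _ _ (by u_omega) (Or.inl (by u_omega))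
      refine ShadowInv.writeLE ?_ _ _ _ (by u_omega) (Or.inl (by u_omega))
      refine om_stack_store ?_ (u.reg .rsp) 1920 _ (by u_omega) (by omega) (by decide)
      refine om_stack_store ?_ (u.reg .rsp) 1912 _ (by u_omega) (by omega) (by decide)
      exact om_stack_store hinv (u.reg .rsp) 1928 _ (by u_omega) (by omega) (by decide)
    have ep' : (s_119b02.reg .rdi).toNat = (u.reg .rsp).toNat - 1976 := by
      rw [w_rdi]
      u_omega
    have hfix' := om_fixedLive_push ((u.reg .rsp).toNat - 2024) Vorbis.Frames.stb_vorbis_open_memory hfix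
    have hpl := om_p_live others frames (u.reg .rsp).toNat (by omega)
    have hstk : 0x700000 ≤ (u.reg .rsp).toNat - 1976 ∧ (u.reg .rsp).toNat - 1976 + Off.sizeof.stb_vorbis ≤ 0x800000 := by
      simp only [voff]
      omega
    have ea48 : addr ((u.reg .rsp).toNat - 1976 + 48) = u.reg .rsp - 1928 := by
      apply UInt64.toNat_inj.mp
      rw [toNat_addr _ (by omega)]
      u_omega
    have ea56 : addr ((u.reg .rsp).toNat - 1976 + 56) = u.reg .rsp - 1920 := by
      apply UInt64.toNat_inj.mp
      rw [toNat_addr _ (by omega)]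
      u_omega
    have ea64 : addr ((u.reg .rsp).toNat - 1976 + 64) = u.reg .rsp - 1912 := by
      apply UInt64.toNat_inj.mp
      rw [toNat_addr _ (by omega)]
      u_omega
    refine ⟨⟨hinvC, hsh.offText⟩, ?_, ?_, ?_⟩
    · rw [ep']
      refine om_p3 harena h0 hinvC.shadow.covers hfix' hpl hlen hstk (by omega) ?_ ?_ ?_ ?_ ?_
      · u_memnorm
        u_eqon
      · u_memnorm
        u_eqon
      · simp only [vacc, voff]
        unfold Mem.u64
        rw [ea48, w_mem]
        u_read
      · simp only [vacc, voff]
        unfold Mem.u64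
        rw [ea56, w_mem]
        u_read
      · simp only [vacc, voff]
        unfold Mem.u64
        rw [ea64, w_mem]
        u_read
    · rw [ep']
      exact TopCheck.handOK_of_fixedLive hfix' hlen rfl hpl (by simp only [voff]; omega)
    · have hsm : Mem.SameExcept [⟨(u.reg .rsp).toNat - 6208, (u.reg .rsp).toNat⟩, ⟨0x800000, 0xC00000⟩, ⟨0xC00000, 0xE00000⟩,
          ⟨0x121c00, 0x122000⟩, ⟨(u.reg .rdx).toNat, (u.reg .rdx).toNat + 4⟩] u.mem s_119b02.mem := by
        have := hm.same
        u_same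
      exact (om_consts hconsts hsm (by omega) (by omega)).log2
  · -- after start_decoder (cut2, 0x119b07)
    v_after_call w_rsp_119b02 w_mem_119b02
    simp only [StartDecoder.writes, objBlock, Block.span, Asan.shadowSpan, w_rdi_119b02, w_rsp_119b02, voff,
      Vorbis.Frames.start_decoder] at w_same
    have c_same := hm.same
    have k0 := hm.k0
    have k1 := hm.k1
    have k2 := hm.k2
    have k3 := hm.k3
    have k4 := hm.k4
    have q0 : UInt64.ofNat (s_119b02r.mem.readLE (u.reg .rsp) 8) = ret := by
      u_frame k0
    have q1 : UInt64.ofNat (s_119b02r.mem.readLE (u.reg .rsp - 8) 8) = u.reg .r13 := by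
      u_frame k1
    have q2 : UInt64.ofNat (s_119b02r.mem.readLE (u.reg .rsp - 16) 8) = u.reg .r12 := by
      u_frame k2
    have q3 : UInt64.ofNat (s_119b02r.mem.readLE (u.reg .rsp - 24) 8) = u.reg .rbp := by
      u_frame k3
    have q4 : UInt64.ofNat (s_119b02r.mem.readLE (u.reg .rsp - 32) 8) = u.reg .rbx := by
      u_frame k4
    have hsame : Mem.SameExcept [⟨(u.reg .rsp).toNat - 6208, (u.reg .rsp).toNat⟩, ⟨0x800000, 0xC00000⟩, ⟨0xC00000, 0xE00000⟩,
        ⟨0x121c00, 0x122000⟩, ⟨(u.reg .rdx).toNat, (u.reg .rdx).toNat + 4⟩] u.mem s_119b02r.mem := by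
      u_same
    have ep' : (s_119b02.reg .rdi).toNat = (u.reg .rsp).toNat - 1976 := by
      rw [w_rdi_119b02]
      u_omega
    have ersp : (s_119b02r.reg .rsp).toNat = (u.reg .rsp).toNat - 2024 := by
      rw [w_rsp]
      u_omega
    obtain ⟨A, hext, hinvA, hoffA, hhandA, hcase⟩ := w_post
    rw [ep'] at hhandA hcase
    rw [ersp] at hinvA
    refine hnext s_119b02r ?_ ⟨om_consts hconsts hsame (by omega) (by omega), A, hext, hinvA, hoffA, hhandA, hcase⟩
    refine ⟨w_rip, w_rsp, ?_, ?_, ?_, ?_, q0, q1, q2, q3, q4, w_eq, w_inv, hsame⟩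
    · rw [w_kept .rbx rfl]
      exact c_rbx
    · rw [w_kept .r12 rfl]
      exact c_r12
    · rw [w_kept .r14 rfl]
      exact hm.r14
    · rw [w_kept .r15 rfl]
      exact hm.r15

/-- **The fixed objects are live without the own frame too** (the post's `ShadowGrown.fixed`, after the epilogue): the input,
the output and the globals lie off the stack region, so their bytes belong to objects of the list `others'`. -/
theorem om_fixedLive_pop {len p top : Nat} {others' : List Obj} {frames frames' : List (Nat × FrameLayout)} {Ar : Arena}
    {mem : Mem} (hinv : ShadowInv others' frames' top mem) (hh : Hand others' frames' len Ar p)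
    (hl : BlkLive (listBlk (fixedBlocks len)) (LiveSet others' frames')) (hlen : len ≤ 0x1FF000) :
    Top.FixedLive len others' frames := by
  refine ⟨?_, ?_, ?_, hh.globals⟩
  · intro B hB i hi
    have hx := hl B hB i hi
    have hoff := fixed_off_stack len hlen B hB
    obtain ⟨o, ho, hb⟩ := live_others hinv hx (by omega)
    exact ⟨o, List.mem_append_right _ ho, hb⟩
  · intro hpos
    exact liveIn_reframe hinv (hh.inp hpos) hpos (by simp only [IN]; omega)
  · exact liveIn_reframe hinv hh.out (by simp only [blockOUT]; omega) (by simp only [blockOUT]; omega)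

/-- The callers' protected frames lie above the return-address slot. -/
theorem om_callers {others : List Obj} {frames : List (Nat × FrameLayout)} {top : Nat} {mem : Mem}
    (h : ShadowInv others frames top mem) : ∀ bF, bF ∈ frames → top ≤ bF.1 := by
  intro bF hbF
  obtain ⟨_, _, h3, _, _⟩ := h.stack.active bF hbF
  exact h3

/-- **Stage 3, the failing arm: from start_decoder's return with eax = 0 (cut2, 0x119b07) to the `ret`**: `*error = p.error`
(check store4), `vorbis_deinit(&p)` with `DeinitOK` from SD.ERR, the epilogue's three shadow stores, four pops. -/
theorem om_stage3_fail (Lay : Layout) (hLay : Lay.hi = 0x1000000) (μ : Microarch) (hμ : UserX.MicroOK μ) (u₀ : State)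
    (hcode : HasCodeNat Lay u₀ Vorbis.L.stb_vorbis_open_memory.entry Vorbis.Code.code_stb_vorbis_open_memory.nat Vorbis.L.stb_vorbis_open_memory.size)
    (h_store4 : Asan.SmallCheck Lay μ Vorbis.WayInv (Vorbis.CodeOK u₀) [.rax, .rcx, .rdx] 4 Vorbis.L.__asan_store4_noabort.entry)
    (h_deinit : ∀ (others : List Obj) (frames : List (Nat × FrameLayout)) (Blk : Block → Prop), Calls Lay μ Vorbis.WayInv (Vorbis.conv u₀) Vorbis.L.vorbis_deinit.entry (Vorbis.Spec.vorbis_deinit.spec others frames Blk))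
    (others : List Obj) (frames : List (Nat × FrameLayout)) (len : Nat) (u : State) (ret : Word)
    (he : AtEntry (conv u₀) Vorbis.L.stb_vorbis_open_memory.entry (Vorbis.Spec.stb_vorbis_open_memory.spec others frames len).frame ret u)
    (hpre : (Vorbis.Spec.stb_vorbis_open_memory.spec others frames len).pre u)
    (s : State) (hm : OmMid u₀ u ret Vorbis.L.stb_vorbis_open_memory.cut2 s)
    (hcon : Consts s.mem) (A : Arena × List Obj)
    (hext : (⟨0x800000, 0x400000, 0, 0x400000, [], []⟩ : Arena).Extends A.1)
    (hinvA : ShadowInv A.2 (((u.reg .rsp).toNat - 2024, Vorbis.Frames.stb_vorbis_open_memory) :: frames) ((u.reg .rsp).toNat - 2024) s.mem)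
    (hoffA : ∀ o, o ∈ A.2 → L.textHi ≤ o.base)
    (hhandA : StartDecoder.HandOK len ((u.reg .rsp).toNat - 1976)
      (((u.reg .rsp).toNat - 2024, Vorbis.Frames.stb_vorbis_open_memory) :: frames) A)
    (c_rax : (s.reg .rax).toNat % 2 ^ 32 = 0)
    (hfail : StartDecoder.Failed len ((u.reg .rsp).toNat - 1976)
          (Asan.Live (stackObjs (((u.reg .rsp).toNat - 2024, Vorbis.Frames.stb_vorbis_open_memory) :: frames) ++ A.2)) A s.mem) :
    ReachVia Lay μ WayInv s (Returned (conv u₀) (Vorbis.Spec.stb_vorbis_open_memory.spec others frames len) u ret) := by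
  v_entry he
  obtain ⟨hsh, hrdi, hrsi, hlen, herr, halloc, hapart, hB, hL, hfix, hfree, hconsts⟩ := hpre
  have hwe : (u.reg .rsp).toNat + 8 ≤ (u.reg .rdx).toNat ∧ (u.reg .rdx).toNat + 4 ≤ 0x800000 := by
    have := herr.1.above hsh.inv
    have := herr.2
    omega
  -- the three shadow addresses of the epilogue's inline stores, named
  obtain ⟨a1, ha1⟩ : ∃ a : Word, (u.reg .rsp - 2024) >>> 3 + 12582912 = a := ⟨_, rfl⟩
  obtain ⟨a3, ha3⟩ : ∃ a : Word, (u.reg .rsp - 2024) >>> 3 + 12583144 = a := ⟨_, rfl⟩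
  obtain ⟨a5, ha5⟩ : ∃ a : Word, (u.reg .rsp - 2024) >>> 3 + 12583152 = a := ⟨_, rfl⟩
  have hn1 := om_shaddr_toNat _ _ _ 0 ha1 (by omega) (by omega) (by decide) (by decide)
  have hn3 := om_shaddr_toNat _ _ _ 232 ha3 (by omega) (by omega) (by decide) (by decide)
  have hn5 := om_shaddr_toNat _ _ _ 240 ha5 (by omega) (by omega) (by decide) (by decide)
  obtain ⟨q, hq⟩ : ∃ q : Nat, ((u.reg .rsp).toNat - 2024) / 8 = q := ⟨_, rfl⟩
  have hqb : 917504 ≤ q ∧ q ≤ 1048576 := by omega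
  rw [hq] at hn1 hn3 hn5
  clear hq
  have hdi := h_deinit A.2 (((u.reg .rsp).toNat - 2024, Vorbis.Frames.stb_vorbis_open_memory) :: frames)
    (StartDecoder.blk len ((u.reg .rsp).toNat - 1976) A)
  -- the present state
  have w_rip := hm.rip
  have c_rsp : s.reg .rsp = u.reg .rsp - 2024 := hm.rsp
  have c_rbx : s.reg .rbx = (u.reg .rsp - 2024) >>> 3 := hm.rbx
  have c_r12 : s.reg .r12 = u.reg .rdx := hm.r12
  have w_kept : RegsKept [.rsp] s s := RegsKept.refl _ _
  have w_eq : Mem.EqOn Vorbis.L.textLo Vorbis.L.textHi u₀.mem s.mem := hm.code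
  have hdf : s.flags .df = false := (show abiInv _ from hm.inv).1
  have hmx : s.mxcsr &&& 0x1F80 = 0x1F80 := (show abiInv _ from hm.inv).2
  have hsse := Vorbis.sseOK_of_abiInv hm.inv
  have c_same := hm.same
  have k0 := hm.k0
  have k1 := hm.k1
  have k2 := hm.k2
  have k3 := hm.k3
  have k4 := hm.k4
  have c_rax' : (Word.part Width.w32 (s.reg .rax)).toNat = 0 := by
    rw [Vorbis.toNat_part32]
    exact c_rax
  have hAB : A.1.B = 0x800000 := hext.B
  have hinvT : ∀ m' : Mem, Mem.SameExcept [⟨(u.reg .rsp).toNat - 2032, (u.reg .rsp).toNat - 2024⟩,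
      ⟨(u.reg .rdx).toNat, (u.reg .rdx).toNat + 4⟩] s.mem m' → ShadowUntouched s.mem m' := by
    intro m' hs
    unfold Asan.ShadowUntouched
    refine hs.eqOn _ _ ?_
    intro w hw
    simp only [List.mem_cons, List.not_mem_nil, or_false] at hw
    rcases hw with rfl | rfl <;> simp only [] <;> omega
  u_walk hcode [hμ.vendor, ha1, ha3, ha5] until [Vorbis.L.stb_vorbis_open_memory.cut3] span [Vorbis.L.textLo, Vorbis.L.textHi] side (v_side)
  · -- the check of `*error = p.error` (0x119ba1): `error` is a stack object of the caller
    have hle : LiveIn A.2 (((u.reg .rsp).toNat - 2024, Vorbis.Frames.stb_vorbis_open_memory) :: frames) (u.reg .rdx).toNat 4 :=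
      om_stackObj_live herr hsh.inv (by decide)
    have hun : ShadowUntouched s.mem s_119ba1.mem := by v_untouched
    exact hle.accSmall hinvA hun _ 4 (by decide) (by u_omega) (by u_omega)
  · v_inv
  · -- vorbis_deinit's precondition: DeinitOK(&p) from SD.ERR
    have hsm : Mem.SameExcept [⟨(u.reg .rsp).toNat - 2032, (u.reg .rsp).toNat - 2024⟩,
        ⟨(u.reg .rdx).toNat, (u.reg .rdx).toNat + 4⟩] s.mem s_119baf.mem := by
      u_same
    have hun := hinvT _ hsm
    have e : (s_119baf.reg .rsp).toNat + 8 = (u.reg .rsp).toNat - 2024 := by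
      rw [w_rsp]
      u_omega
    have ep' : (s_119baf.reg .rdi).toNat = (u.reg .rsp).toNat - 1976 := by
      rw [w_rdi]
      u_omega
    refine ⟨⟨?_, hoffA⟩, hfail.err.env.ok, hfail.err.env.live, ?_⟩
    · rw [e]
      exact hinvA.untouched hun
    · rw [ep']
      refine hfail.err.deinit.agree ?_
      exact om_allKept hfail.err.env.ok (by omega) hlen (by omega) hwe hsm
  · -- after vorbis_deinit (cut6, 0x119bb4): the epilogue
    v_after_call w_rsp_119baf w_mem_119baf
    have hunD : ShadowUntouched s_119baf.mem s_119bafr.mem := w_post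
    have q0 : UInt64.ofNat (s_119bafr.mem.readLE (u.reg .rsp) 8) = ret := by
      u_frame k0
    have q1 : UInt64.ofNat (s_119bafr.mem.readLE (u.reg .rsp - 8) 8) = u.reg .r13 := by
      u_frame k1
    have q2 : UInt64.ofNat (s_119bafr.mem.readLE (u.reg .rsp - 16) 8) = u.reg .r12 := by
      u_frame k2
    have q3 : UInt64.ofNat (s_119bafr.mem.readLE (u.reg .rsp - 24) 8) = u.reg .rbp := by
      u_frame k3
    have q4 : UInt64.ofNat (s_119bafr.mem.readLE (u.reg .rsp - 32) 8) = u.reg .rbx := by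
      u_frame k4
    have hsame : Mem.SameExcept [⟨(u.reg .rsp).toNat - 6208, (u.reg .rsp).toNat⟩, ⟨0x800000, 0xC00000⟩, ⟨0xC00000, 0xE00000⟩,
        ⟨0x121c00, 0x122000⟩, ⟨(u.reg .rdx).toNat, (u.reg .rdx).toNat + 4⟩] u.mem s_119bafr.mem := by
      u_same
    have hsm : Mem.SameExcept [⟨(u.reg .rsp).toNat - 2032, (u.reg .rsp).toNat - 2024⟩,
        ⟨(u.reg .rdx).toNat, (u.reg .rdx).toNat + 4⟩] s.mem s_119baf.mem := by
      rw [w_mem_119baf]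
      u_same
    have hinvD : ShadowInv A.2 (((u.reg .rsp).toNat - 2024, Vorbis.Frames.stb_vorbis_open_memory) :: frames)
        ((u.reg .rsp).toNat - 2024) s_119bafr.mem :=
      (hinvA.untouched (hinvT _ hsm)).untouched hunD
    have c_rbx' : s_119bafr.reg .rbx = (u.reg .rsp - 2024) >>> 3 := by
      rw [w_kept .rbx rfl]
      exact c_rbx
    u_walk hcode [hμ.vendor, ha1, ha3, ha5] span [Vorbis.L.textLo, Vorbis.L.textHi] side (v_side)
    -- the `ret`: the contract's `Returned`
    refine ReachVia.done ?_
    v_returned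
    · -- the post: the shadow layer with the own frame popped, for start_decoder's object list; rax = 0
      refine ⟨A.2, ⟨?_, ?_, hoffA⟩, Or.inl w_rax⟩
      · have e : (s_119bea.reg .rsp).toNat = (u.reg .rsp).toNat + 8 := by
          rw [w_rsp]
          u_omega
        rw [e, w_mem]
        exact om_epilogue ha1 ha3 ha5 hinvD he_align (by omega) (by omega) (om_callers hsh.inv)
      · refine om_fixedLive_pop hinvA hhandA.toHand ?_ hlen
        exact BlkLive.sub hfail.err.env.live (fun B hB => runBlk_extra (List.mem_cons_of_mem _ hB))
    · -- the callee-saved registers: four popped back, r14 and r15 never touched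
      intro r hr
      cases r <;> first
        | (exact absurd hr (by decide))
        | (with_reducible assumption)
        | (rw [w_kept .r14 rfl]; exact hm.r14)
        | (rw [w_kept .r15 rfl]; exact hm.r15)

/-- **Stage 6, the end of the succeeding arm: from vorbis_pump_first_frame's return (cut5, 0x119b48) to the `ret`**:
`*error = 0` (check store4), the epilogue's three shadow stores, four pops; the frame boundary of the arena copy is carried over
the popped frame by `DecodeInv.carry`. `fw` = the arena copy (rbp). -/
theorem om_stage6 (Lay : Layout) (hLay : Lay.hi = 0x1000000) (μ : Microarch) (hμ : UserX.MicroOK μ) (u₀ : State)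
    (hcode : HasCodeNat Lay u₀ Vorbis.L.stb_vorbis_open_memory.entry Vorbis.Code.code_stb_vorbis_open_memory.nat Vorbis.L.stb_vorbis_open_memory.size)
    (h_store4 : Asan.SmallCheck Lay μ Vorbis.WayInv (Vorbis.CodeOK u₀) [.rax, .rcx, .rdx] 4 Vorbis.L.__asan_store4_noabort.entry)
    (others : List Obj) (frames : List (Nat × FrameLayout)) (len : Nat) (u : State) (ret : Word)
    (he : AtEntry (conv u₀) Vorbis.L.stb_vorbis_open_memory.entry (Vorbis.Spec.stb_vorbis_open_memory.spec others frames len).frame ret u)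
    (hpre : (Vorbis.Spec.stb_vorbis_open_memory.spec others frames len).pre u)
    (s : State) (hm : OmMid u₀ u ret Vorbis.L.stb_vorbis_open_memory.cut5 s)
    (fw : Word) (c_rbp : s.reg .rbp = fw) (others' : List Obj) (A' : Arena) (ysz : Nat → Nat)
    (hAB : A'.B = 0x800000) (hAL : A'.L = 0x400000)
    (hinv' : ShadowInv others' (((u.reg .rsp).toNat - 2024, Vorbis.Frames.stb_vorbis_open_memory) :: frames) ((u.reg .rsp).toNat - 2024) s.mem)
    (hoff' : ∀ o, o ∈ others' → L.textHi ≤ o.base)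
    (hdi : DecodeInv others' (((u.reg .rsp).toNat - 2024, Vorbis.Frames.stb_vorbis_open_memory) :: frames) len A' 0 0 ysz s.mem fw.toNat) :
    ReachVia Lay μ WayInv s (Returned (conv u₀) (Vorbis.Spec.stb_vorbis_open_memory.spec others frames len) u ret) := by
  v_entry he
  obtain ⟨hsh, hrdi, hrsi, hlen, herr, halloc, hapart, hB, hL, hfix, hfree, hconsts⟩ := hpre
  have hwe : (u.reg .rsp).toNat + 8 ≤ (u.reg .rdx).toNat ∧ (u.reg .rdx).toNat + 4 ≤ 0x800000 := by
    have := herr.1.above hsh.inv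
    have := herr.2
    omega
  -- the three shadow addresses of the epilogue's inline stores, named
  obtain ⟨a1, ha1⟩ : ∃ a : Word, (u.reg .rsp - 2024) >>> 3 + 12582912 = a := ⟨_, rfl⟩
  obtain ⟨a3, ha3⟩ : ∃ a : Word, (u.reg .rsp - 2024) >>> 3 + 12583144 = a := ⟨_, rfl⟩
  obtain ⟨a5, ha5⟩ : ∃ a : Word, (u.reg .rsp - 2024) >>> 3 + 12583152 = a := ⟨_, rfl⟩
  have hn1 := om_shaddr_toNat _ _ _ 0 ha1 (by omega) (by omega) (by decide) (by decide)
  have hn3 := om_shaddr_toNat _ _ _ 232 ha3 (by omega) (by omega) (by decide) (by decide)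
  have hn5 := om_shaddr_toNat _ _ _ 240 ha5 (by omega) (by omega) (by decide) (by decide)
  obtain ⟨q, hq⟩ : ∃ q : Nat, ((u.reg .rsp).toNat - 2024) / 8 = q := ⟨_, rfl⟩
  have hqb : 917504 ≤ q ∧ q ≤ 1048576 := by omega
  rw [hq] at hn1 hn3 hn5
  clear hq
  -- the present state
  have w_rip := hm.rip
  have c_rsp : s.reg .rsp = u.reg .rsp - 2024 := hm.rsp
  have c_rbx : s.reg .rbx = (u.reg .rsp - 2024) >>> 3 := hm.rbx
  have c_r12 : s.reg .r12 = u.reg .rdx := hm.r12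
  have w_kept : RegsKept [.rsp] s s := RegsKept.refl _ _
  have w_eq : Mem.EqOn Vorbis.L.textLo Vorbis.L.textHi u₀.mem s.mem := hm.code
  have hdf : s.flags .df = false := (show abiInv _ from hm.inv).1
  have hmx : s.mxcsr &&& 0x1F80 = 0x1F80 := (show abiInv _ from hm.inv).2
  have hsse := Vorbis.sseOK_of_abiInv hm.inv
  have c_same := hm.same
  have k0 := hm.k0
  have k1 := hm.k1
  have k2 := hm.k2
  have k3 := hm.k3
  have k4 := hm.k4
  u_walk hcode [hμ.vendor, ha1, ha3, ha5] span [Vorbis.L.textLo, Vorbis.L.textHi] side (v_side)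
  · -- the check of `*error = 0` (0x119b50): `error` is a stack object of the caller
    have hle : LiveIn others' (((u.reg .rsp).toNat - 2024, Vorbis.Frames.stb_vorbis_open_memory) :: frames) (u.reg .rdx).toNat 4 :=
      om_stackObj_live herr hsh.inv (by decide)
    have hun : ShadowUntouched s.mem s_119b50.mem := by v_untouched
    exact hle.accSmall hinv' hun _ 4 (by decide) (by u_omega) (by u_omega)
  · -- the `ret`: the contract's `Returned`
    have hsm : Mem.SameExcept [⟨(u.reg .rsp).toNat - 2032, (u.reg .rsp).toNat - 2024⟩,
        ⟨(u.reg .rdx).toNat, (u.reg .rdx).toNat + 4⟩] s.mem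
        ((s.mem.writeLE (u.reg Reg.rsp - 2032) 8 1153877).writeLE (u.reg Reg.rdx) 4 0) := by
      u_same
    have hunS : ShadowUntouched s.mem ((s.mem.writeLE (u.reg Reg.rsp - 2032) 8 1153877).writeLE (u.reg Reg.rdx) 4 0) := by
      unfold Asan.ShadowUntouched
      refine hsm.eqOn _ _ ?_
      intro w hw
      simp only [List.mem_cons, List.not_mem_nil, or_false] at hw
      rcases hw with rfl | rfl <;> simp only [] <;> omega
    have hinvS := hinv'.untouched hunS
    have e : (s_119bea.reg .rsp).toNat = (u.reg .rsp).toNat + 8 := by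
      rw [w_rsp]
      u_omega
    have hinvE : ShadowInv others' frames ((s_119bea.reg .rsp).toNat) s_119bea.mem := by
      rw [e, w_mem]
      exact om_epilogue ha1 ha3 ha5 hinvS he_align (by omega) (by omega) (om_callers hsh.inv)
    refine ReachVia.done ?_
    v_returned
    · -- the post: the shadow layer with the own frame popped; the frame boundary of the arena copy
      refine ⟨others', ⟨hinvE, ?_, hoff'⟩, Or.inr ⟨A', ysz, hAB, hAL, ?_⟩⟩
      · refine om_fixedLive_pop hinv' hdi.hand ?_ hlen
        exact BlkLive.sub hdi.live (fun B hB => runBlk_extra hB)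
      · rw [w_rax]
        have hs3 : Mem.SameExcept [⟨(u.reg .rsp).toNat - 2032, (u.reg .rsp).toNat - 2024⟩,
            ⟨(u.reg .rdx).toNat, (u.reg .rdx).toNat + 4⟩, ⟨0xC00000, 0xE00000⟩] s.mem s_119bea.mem := by
          rw [w_mem]
          u_same
        refine hdi.carry hinv' ?_ hinvE
        refine AllKept.of_sameExcept hdi.ok hs3 ?_
        intro B hB w hw
        have h1 := hdi.offStack B hB
        have h2 := (hdi.ok.inside B hB).2
        simp only [List.mem_cons, List.not_mem_nil, or_false] at hw
        rcases hw with rfl | rfl | rfl <;> simp only [] <;> omega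
    · -- the callee-saved registers: four popped back, r14 and r15 never touched
      intro r hr
      cases r <;> first
        | (exact absurd hr (by decide))
        | (with_reducible assumption)
        | (rw [w_kept .r14 rfl]; exact hm.r14)
        | (rw [w_kept .r15 rfl]; exact hm.r15)

/-- **Stage 4, the succeeding arm: from start_decoder's return with eax = 1 (cut2, 0x119b07) to memcpy's return (cut4,
0x119b40)**: `f = vorbis_alloc(&p)` (succeeds by the final test of SD.12), the `f == NULL` test (dead), the check
`__asan_storeN(f, 1808)`, `memcpy(f, &p, 1808)`. `hnext` is the rest of the function. -/
theorem om_stage4 (Lay : Layout) (hLay : Lay.hi = 0x1000000) (μ : Microarch) (hμ : UserX.MicroOK μ) (u₀ : State)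
    (hcode : HasCodeNat Lay u₀ Vorbis.L.stb_vorbis_open_memory.entry Vorbis.Code.code_stb_vorbis_open_memory.nat Vorbis.L.stb_vorbis_open_memory.size)
    (h_alloc : ∀ (others : List Obj) (frames : List (Nat × FrameLayout)) (A : Arena), Calls Lay μ Vorbis.WayInv (Vorbis.conv u₀) Vorbis.L.vorbis_alloc.entry (Vorbis.Spec.vorbis_alloc.spec others frames A))
    (h_storeN : Calls Lay μ Vorbis.WayInv (Vorbis.conv u₀) Vorbis.L.__asan_storeN_noabort.entry Asan.checkNSpec)
    (h_memcpy : ∀ (others : List Obj) (frames : List (Nat × FrameLayout)), Calls Lay μ Vorbis.WayInv (Vorbis.conv u₀) Vorbis.L.memcpy.entry (Vorbis.Spec.memcpy.spec others frames))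
    (others : List Obj) (frames : List (Nat × FrameLayout)) (len : Nat) (u : State) (ret : Word)
    (he : AtEntry (conv u₀) Vorbis.L.stb_vorbis_open_memory.entry (Vorbis.Spec.stb_vorbis_open_memory.spec others frames len).frame ret u)
    (hpre : (Vorbis.Spec.stb_vorbis_open_memory.spec others frames len).pre u)
    (Q : State → Prop)
    (s : State)
    (hm : OmMid u₀ u ret Vorbis.L.stb_vorbis_open_memory.cut2 s)
    (A : Arena × List Obj)
    (hext : (⟨0x800000, 0x400000, 0, 0x400000, [], []⟩ : Arena).Extends A.1)
    (hinvA : ShadowInv A.2 (((u.reg .rsp).toNat - 2024, Vorbis.Frames.stb_vorbis_open_memory) :: frames) ((u.reg .rsp).toNat - 2024) s.mem)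
    (hoffA : ∀ o, o ∈ A.2 → L.textHi ≤ o.base)
    (hhandA : StartDecoder.HandOK len ((u.reg .rsp).toNat - 1976)
      (((u.reg .rsp).toNat - 2024, Vorbis.Frames.stb_vorbis_open_memory) :: frames) A)
    (c_rax : (s.reg .rax).toNat % 2 ^ 32 = 1)
    (hdone : StartDecoder.Done len ((u.reg .rsp).toNat - 1976)
          (Asan.Live (stackObjs (((u.reg .rsp).toNat - 2024, Vorbis.Frames.stb_vorbis_open_memory) :: frames) ++ A.2)) A s.mem)
    (hnext : ∀ (s' : State) (fw : Word), OmMid u₀ u ret Vorbis.L.stb_vorbis_open_memory.cut4 s' → s'.reg .rbp = fw →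
      fw.toNat = 0x800000 + A.1.S + 32 →
      (∃ m1 : Mem,
        (A.1.Fits Off.sizeof.stb_vorbis ∧
          ArenaOK (A.1.pushSetup Off.sizeof.stb_vorbis) (A.1.newSetupObj Off.sizeof.stb_vorbis :: A.2) m1
            ((u.reg .rsp).toNat - 1976)) ∧
        Mem.SameExcept [⟨(u.reg .rsp).toNat - 6208, (u.reg .rsp).toNat - 2024⟩,
          ⟨(u.reg .rsp).toNat - 1976 + 8, (u.reg .rsp).toNat - 1976 + 12⟩,
          ⟨(u.reg .rsp).toNat - 1976 + 128, (u.reg .rsp).toNat - 1976 + 132⟩, ⟨0xC00000, 0xE00000⟩] s.mem m1 ∧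
        (∀ i, i < 1808 → s'.mem.readLE (fw + UInt64.ofNat i) 1 = m1.readLE (u.reg .rsp - 1976 + UInt64.ofNat i) 1) ∧
        Mem.SameExcept [⟨(u.reg .rsp).toNat - 6208, (u.reg .rsp).toNat - 2024⟩, ⟨fw.toNat, fw.toNat + 1808⟩] m1 s'.mem) →
      ShadowInv (A.1.newSetupObj Off.sizeof.stb_vorbis :: A.2)
        (((u.reg .rsp).toNat - 2024, Vorbis.Frames.stb_vorbis_open_memory) :: frames) ((u.reg .rsp).toNat - 2024) s'.mem →
      ReachVia Lay μ WayInv s' Q) :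
    ReachVia Lay μ WayInv s Q := by
  v_entry he
  obtain ⟨hsh, hrdi, hrsi, hlen, herr, halloc, hapart, hB, hL, hfix, hfree, hconsts⟩ := hpre
  have hwe : (u.reg .rsp).toNat + 8 ≤ (u.reg .rdx).toNat ∧ (u.reg .rdx).toNat + 4 ≤ 0x800000 := by
    have := herr.1.above hsh.inv
    have := herr.2
    omega
  have hal := h_alloc A.2 (((u.reg .rsp).toNat - 2024, Vorbis.Frames.stb_vorbis_open_memory) :: frames) A.1
  have hmc := h_memcpy (A.1.newSetupObj Off.sizeof.stb_vorbis :: A.2)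
    (((u.reg .rsp).toNat - 2024, Vorbis.Frames.stb_vorbis_open_memory) :: frames)
  have c_rax' : ¬ (Word.part Width.w32 (s.reg .rax)).toNat = 0 := by
    rw [Vorbis.toNat_part32]
    omega
  -- the present state
  have w_rip := hm.rip
  have c_rsp : s.reg .rsp = u.reg .rsp - 2024 := hm.rsp
  have c_rbx : s.reg .rbx = (u.reg .rsp - 2024) >>> 3 := hm.rbx
  have c_r12 : s.reg .r12 = u.reg .rdx := hm.r12
  have w_kept : RegsKept [.rsp] s s := RegsKept.refl _ _
  have w_eq : Mem.EqOn Vorbis.L.textLo Vorbis.L.textHi u₀.mem s.mem := hm.code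
  have hdf : s.flags .df = false := (show abiInv _ from hm.inv).1
  have hmx : s.mxcsr &&& 0x1F80 = 0x1F80 := (show abiInv _ from hm.inv).2
  have hsse := Vorbis.sseOK_of_abiInv hm.inv
  have c_same := hm.same
  have k0 := hm.k0
  have k1 := hm.k1
  have k2 := hm.k2
  have k3 := hm.k3
  have k4 := hm.k4
  u_walk hcode [hμ.vendor] until [Vorbis.L.stb_vorbis_open_memory.cut3] span [Vorbis.L.textLo, Vorbis.L.textHi] side (v_side)
  · v_inv
  · -- vorbis_alloc's precondition: the allocators' `ArenaPre` from SD.12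
    have e : (s_119b14.reg .rsp).toNat + 8 = (u.reg .rsp).toNat - 2024 := by
      rw [w_rsp]
      u_omega
    have ep' : (s_119b14.reg .rdi).toNat = (u.reg .rsp).toNat - 1976 := by
      rw [w_rdi]
      u_omega
    refine ⟨⟨?_, hoffA⟩, ?_, ?_, hhandA.arenaText⟩
    · rw [e, w_mem]
      exact om_stack_store hinvA (u.reg .rsp) 2032 _ (by u_omega) (by omega) (by decide)
    · rw [ep']
      exact hhandA.toHand.objLive
    · rw [ep']
      refine hdone.arena.frame (by simp only [voff]; omega) ?_
      simp only [voff]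
      u_memnorm
      u_eqon
  · -- after vorbis_alloc (cut3, 0x119b19)
    v_after_call w_rsp_119b14 w_mem_119b14
    simp only [w_rdi_119b14, Asan.shadowSpan, voff] at w_same
    have hsA := w_same
    clear w_same
    have hAB : A.1.B = 0x800000 := hext.B
    have hAL : A.1.L = 0x400000 := hext.L
    have hAR2 := hdone.arena.AR2
    -- the final test of SD.12: the allocation fits
    have hfin : A.1.S + Off.sizeof.stb_vorbis + tmr s.mem ((u.reg .rsp).toNat - 1976) + 64 ≤ A.1.T := by
      have hf := hdone.final.fits
      rw [hdone.arena.AR5.setup, hdone.arena.AR5.temp] at hf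
      simp only [voff]
      omega
    have hfits : A.1.Fits Off.sizeof.stb_vorbis := ArenaOK.vorbis_alloc_fits A.1 _ hfin
    obtain ⟨hrax, harena1, hinv1⟩ := w_post.1 hfits
    have ep' : (s_119b14.reg .rdi).toNat = (u.reg .rsp).toNat - 1976 := by
      rw [w_rdi_119b14]
      u_omega
    have e14 : (s_119b14.reg .rsp).toNat + 8 = (u.reg .rsp).toNat - 2024 := by
      rw [w_rsp_119b14]
      u_omega
    rw [ep'] at harena1
    rw [e14] at hinv1
    obtain ⟨fw, w_rax⟩ : ∃ z, s_119b14r.reg .rax = z := ⟨_, rfl⟩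
    rw [w_rax, hAB] at hrax
    simp only [voff] at hfin
    have hfw0 : ¬ fw.toNat = 0 := by omega
    have q0 : UInt64.ofNat (s_119b14r.mem.readLE (u.reg .rsp) 8) = ret := by
      u_frame k0
    have q1 : UInt64.ofNat (s_119b14r.mem.readLE (u.reg .rsp - 8) 8) = u.reg .r13 := by
      u_frame k1
    have q2 : UInt64.ofNat (s_119b14r.mem.readLE (u.reg .rsp - 16) 8) = u.reg .r12 := by
      u_frame k2
    have q3 : UInt64.ofNat (s_119b14r.mem.readLE (u.reg .rsp - 24) 8) = u.reg .rbp := by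
      u_frame k3
    have q4 : UInt64.ofNat (s_119b14r.mem.readLE (u.reg .rsp - 32) 8) = u.reg .rbx := by
      u_frame k4
    have hY1 : Mem.SameExcept [⟨(u.reg .rsp).toNat - 6208, (u.reg .rsp).toNat - 2024⟩,
          ⟨(u.reg .rsp).toNat - 1976 + 8, (u.reg .rsp).toNat - 1976 + 12⟩,
          ⟨(u.reg .rsp).toNat - 1976 + 128, (u.reg .rsp).toNat - 1976 + 132⟩, ⟨0xC00000, 0xE00000⟩] s.mem s_119b14r.mem := by
      u_same
    have hsame1 : Mem.SameExcept [⟨(u.reg .rsp).toNat - 6208, (u.reg .rsp).toNat⟩, ⟨0x800000, 0xC00000⟩, ⟨0xC00000, 0xE00000⟩,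
        ⟨0x121c00, 0x122000⟩, ⟨(u.reg .rdx).toNat, (u.reg .rdx).toNat + 4⟩] u.mem s_119b14r.mem := by
      u_same
    u_walk hcode [hμ.vendor] until [Vorbis.L.stb_vorbis_open_memory.cut4] span [Vorbis.L.textLo, Vorbis.L.textHi] side (v_side)
    · v_inv
    · -- the check `__asan_storeN(f, 1808)`: the new block is a live object
      right
      have hacc : Accessible s_119b14r.mem fw.toNat 1808 := by
        refine (hinv1.obj_other (o := A.1.newSetupObj Off.sizeof.stb_vorbis) List.mem_cons_self).accessible (by decide) ?_
        intro i hi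
        unfold Obj.Bytes
        simp only [Arena.newSetupObj, Arena.setupObj, voff, hAB]
        omega
      have e1808 : (Word.ofBV 1808#32).toNat = 1808 := by decide
      rw [w_rdi, w_rsi, e1808]
      refine hacc.eqOn (by decide) ?_
      rw [w_mem]
      refine X86.User.Mem.EqOn.step_writeLE _ _ _ (X86.User.Mem.EqOn.refl _ _ _) (by u_omega) (Or.inl (by u_omega))
    · -- after the check (0x119b2e)
      have w_eq := Vorbis.conv_code_eqOn w_code
      have w_df := (show X86.User.abiInv _ from w_inv).1
      have w_mx := (show X86.User.abiInv _ from w_inv).2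
      have w_sse := Vorbis.sseOK_of_abiInv w_inv
      simp only [X86.User.Spec.footprint, Asan.checkNSpec, w_rsp_119b29] at w_same
      rw [w_mem_119b29] at w_same
      have r0 : UInt64.ofNat (s_119b29r.mem.readLE (u.reg .rsp) 8) = ret := by
        u_frame q0
      have r1 : UInt64.ofNat (s_119b29r.mem.readLE (u.reg .rsp - 8) 8) = u.reg .r13 := by
        u_frame q1
      have r2 : UInt64.ofNat (s_119b29r.mem.readLE (u.reg .rsp - 16) 8) = u.reg .r12 := by
        u_frame q2
      have r3 : UInt64.ofNat (s_119b29r.mem.readLE (u.reg .rsp - 24) 8) = u.reg .rbp := by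
        u_frame q3
      have r4 : UInt64.ofNat (s_119b29r.mem.readLE (u.reg .rsp - 32) 8) = u.reg .rbx := by
        u_frame q4
      have hX2 : Mem.SameExcept [⟨(u.reg .rsp).toNat - 6208, (u.reg .rsp).toNat - 2024⟩] s_119b14r.mem s_119b29r.mem := by
        u_same
      have hun2 : ShadowUntouched s_119b14r.mem s_119b29r.mem := by
        unfold Asan.ShadowUntouched
        refine hX2.eqOn _ _ ?_
        intro w hw
        have e1 : w = ⟨(u.reg .rsp).toNat - 6208, (u.reg .rsp).toNat - 2024⟩ := List.mem_singleton.mp hw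
        subst e1
        simp only
        omega
      have hinv2 := hinv1.untouched hun2
      have hY2 : Mem.SameExcept [⟨(u.reg .rsp).toNat - 6208, (u.reg .rsp).toNat - 2024⟩,
          ⟨(u.reg .rsp).toNat - 1976 + 8, (u.reg .rsp).toNat - 1976 + 12⟩,
          ⟨(u.reg .rsp).toNat - 1976 + 128, (u.reg .rsp).toNat - 1976 + 132⟩, ⟨0xC00000, 0xE00000⟩] s.mem s_119b29r.mem := by
        u_same
      have hsame2 : Mem.SameExcept [⟨(u.reg .rsp).toNat - 6208, (u.reg .rsp).toNat⟩, ⟨0x800000, 0xC00000⟩, ⟨0xC00000, 0xE00000⟩,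
          ⟨0x121c00, 0x122000⟩, ⟨(u.reg .rdx).toNat, (u.reg .rdx).toNat + 4⟩] u.mem s_119b29r.mem := by
        u_same
      have hsC := w_same
      clear w_same
      u_walk hcode [hμ.vendor] until [Vorbis.L.stb_vorbis_open_memory.cut4] span [Vorbis.L.textLo, Vorbis.L.textHi] side (v_side)
      · v_inv
      · -- memcpy's precondition: `p` (a frame object) and the new block, apart
        have e3b : (s_119b3b.reg .rsp).toNat + 8 = (u.reg .rsp).toNat - 2024 := by
          rw [w_rsp]
          u_omega
        have e1808 : (Word.ofBV 1808#32).toNat = 1808 := by decide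
        have ersi : (u.reg .rsp - 1976).toNat = (u.reg .rsp).toNat - 1976 := by u_omega
        refine ⟨⟨?_, ?_⟩, Or.inr ⟨?_, ?_, Or.inr ?_⟩⟩
        · rw [e3b, w_mem]
          exact om_stack_store hinv2 (u.reg .rsp) 2032 _ (by u_omega) (by omega) (by decide)
        · intro o ho
          rcases List.mem_cons.mp ho with rfl | hold
          · simp only [Arena.newSetupObj, Arena.setupObj, hAB]
            have e : L.textHi = 0x119d40 := rfl
            omega
          · exact hoffA o hold
        · rw [w_rsi, w_rdx, e1808, ersi]
          exact om_p_live _ frames (u.reg .rsp).toNat (by omega)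
        · rw [w_rdi, w_rdx, e1808]
          refine ⟨A.1.newSetupObj Off.sizeof.stb_vorbis, List.mem_append_right _ List.mem_cons_self, ?_, ?_⟩
          · simp only [Arena.newSetupObj, Arena.setupObj, hAB]
            omega
          · simp only [Arena.newSetupObj, Arena.setupObj, hAB, voff]
            omega
        · rw [w_rsi, w_rdi, w_rdx, e1808, ersi]
          omega
      · -- after memcpy (cut4, 0x119b40)
        v_after_call w_rsp_119b3b w_mem_119b3b
        have e1808 : (Word.ofBV 1808#32).toNat = 1808 := by decide
        simp only [w_rdi_119b3b, w_rdx_119b3b, e1808] at w_same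
        obtain ⟨_, hunM, hcopy⟩ := w_post
        rw [w_rdi_119b3b, w_rsi_119b3b, w_rdx_119b3b, e1808] at hcopy
        have t0 : UInt64.ofNat (s_119b3br.mem.readLE (u.reg .rsp) 8) = ret := by
          u_frame r0
        have t1 : UInt64.ofNat (s_119b3br.mem.readLE (u.reg .rsp - 8) 8) = u.reg .r13 := by
          u_frame r1
        have t2 : UInt64.ofNat (s_119b3br.mem.readLE (u.reg .rsp - 16) 8) = u.reg .r12 := by
          u_frame r2
        have t3 : UInt64.ofNat (s_119b3br.mem.readLE (u.reg .rsp - 24) 8) = u.reg .rbp := by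
          u_frame r3
        have t4 : UInt64.ofNat (s_119b3br.mem.readLE (u.reg .rsp - 32) 8) = u.reg .rbx := by
          u_frame r4
        have hZ3 : Mem.SameExcept [⟨(u.reg .rsp).toNat - 6208, (u.reg .rsp).toNat - 2024⟩, ⟨fw.toNat, fw.toNat + 1808⟩]
            s_119b3b.mem s_119b3br.mem := by
          rw [w_mem_119b3b]
          u_same
        have hY3 : Mem.SameExcept [⟨(u.reg .rsp).toNat - 6208, (u.reg .rsp).toNat - 2024⟩,
          ⟨(u.reg .rsp).toNat - 1976 + 8, (u.reg .rsp).toNat - 1976 + 12⟩,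
          ⟨(u.reg .rsp).toNat - 1976 + 128, (u.reg .rsp).toNat - 1976 + 132⟩, ⟨0xC00000, 0xE00000⟩] s.mem s_119b3b.mem := by
          rw [w_mem_119b3b]
          u_same
        have hsame3 : Mem.SameExcept [⟨(u.reg .rsp).toNat - 6208, (u.reg .rsp).toNat⟩, ⟨0x800000, 0xC00000⟩, ⟨0xC00000, 0xE00000⟩,
            ⟨0x121c00, 0x122000⟩, ⟨(u.reg .rdx).toNat, (u.reg .rdx).toNat + 4⟩] u.mem s_119b3br.mem := by
          u_same
        have hinv3 : ShadowInv (A.1.newSetupObj Off.sizeof.stb_vorbis :: A.2)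
            (((u.reg .rsp).toNat - 2024, Vorbis.Frames.stb_vorbis_open_memory) :: frames) ((u.reg .rsp).toNat - 2024) s_119b3br.mem := by
          refine ShadowInv.untouched ?_ hunM
          rw [w_mem_119b3b]
          exact om_stack_store hinv2 (u.reg .rsp) 2032 _ (by u_omega) (by omega) (by decide)
        refine hnext s_119b3br fw ?_ w_rbp hrax ⟨s_119b3b.mem, ⟨hfits, ?_⟩, hY3, hcopy, hZ3⟩ hinv3
        · refine ⟨w_rip, w_rsp, ?_, ?_, ?_, ?_, t0, t1, t2, t3, t4, w_eq, w_inv, hsame3⟩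
          · rw [w_kept .rbx rfl]
            exact c_rbx
          · rw [w_kept .r12 rfl]
            exact c_r12
          · rw [w_kept .r14 rfl]
            exact hm.r14
          · rw [w_kept .r15 rfl]
            exact hm.r15
        · refine harena1.frame (by simp only [voff]; omega) ?_
          simp only [voff]
          rw [w_mem_119b3b]
          u_eqon

set_option maxHeartbeats 32000000 in
/-- **Stage 1: from the entry to vorbis_init's return (cut1, 0x119ac9)**: four pushes, `sub rsp, 7C8H`, the frame header words,
the six inline shadow stores of the prologue (`om_prologue_a`: the frame becomes the innermost protected frame, `p` a live
object), the dead `data == NULL` test, `call vorbis_init`. `hnext` is the rest of the function. -/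
theorem om_stage1 (Lay : Layout) (hLay : Lay.hi = 0x1000000) (μ : Microarch) (hμ : UserX.MicroOK μ) (u₀ : State)
    (hcode : HasCodeNat Lay u₀ Vorbis.L.stb_vorbis_open_memory.entry Vorbis.Code.code_stb_vorbis_open_memory.nat Vorbis.L.stb_vorbis_open_memory.size)
    (h_init : ∀ (others : List Obj) (frames : List (Nat × FrameLayout)) (B len : Nat), Calls Lay μ Vorbis.WayInv (Vorbis.conv u₀) Vorbis.L.vorbis_init.entry (Vorbis.Spec.vorbis_init.spec others frames B len))
    (others : List Obj) (frames : List (Nat × FrameLayout)) (len : Nat) (u : State) (ret : Word)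
    (he : AtEntry (conv u₀) Vorbis.L.stb_vorbis_open_memory.entry (Vorbis.Spec.stb_vorbis_open_memory.spec others frames len).frame ret u)
    (hpre : (Vorbis.Spec.stb_vorbis_open_memory.spec others frames len).pre u)
    (Q : State → Prop)
    (hnext : ∀ s, OmMid u₀ u ret Vorbis.L.stb_vorbis_open_memory.cut1 s →
      s.reg .r13 = Word.ofBV (Word.part Width.w32 (u.reg .rsi)) → s.reg .rbp = 2097152 →
      ShadowInv others (((u.reg .rsp).toNat - 2024, Vorbis.Frames.stb_vorbis_open_memory) :: frames)
        ((u.reg .rsp).toNat - 2024) s.mem →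
      H0 s.mem ((u.reg .rsp).toNat - 1976) →
      ArenaOK ⟨0x800000, 0x400000, 0, 0x400000, [], []⟩ others s.mem ((u.reg .rsp).toNat - 1976) →
      ReachVia Lay μ WayInv s Q) :
    ReachVia Lay μ WayInv u Q := by
  v_entry he
  obtain ⟨hsh, hrdi, hrsi, hlen, herr, halloc, hapart, hB, hL, hfix, hfree, hconsts⟩ := hpre
  have hsp := hsh.rsp
  -- where the two out-objects of the caller are: above the return address, inside the stack region
  have hwa : (u.reg .rsp).toNat + 8 ≤ (u.reg .rcx).toNat ∧ (u.reg .rcx).toNat + 16 ≤ 0x800000 := by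
    have := halloc.1.above hsh.inv
    have := halloc.2
    omega
  have hwe : (u.reg .rsp).toNat + 8 ≤ (u.reg .rdx).toNat ∧ (u.reg .rdx).toNat + 4 ≤ 0x800000 := by
    have := herr.1.above hsh.inv
    have := herr.2
    omega
  have hB' : u.mem.readLE (u.reg .rcx) 8 = 0x800000 := by
    have := hB
    unfold Mem.u64 at this
    rw [addr_toNat] at this
    exact this
  -- the six shadow addresses of the prologue's / epilogue's inline stores, named
  obtain ⟨a1, ha1⟩ : ∃ a : Word, (u.reg .rsp - 2024) >>> 3 + 12582912 = a := ⟨_, rfl⟩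
  obtain ⟨a2, ha2⟩ : ∃ a : Word, (u.reg .rsp - 2024) >>> 3 + 12582916 = a := ⟨_, rfl⟩
  obtain ⟨a3, ha3⟩ : ∃ a : Word, (u.reg .rsp - 2024) >>> 3 + 12583144 = a := ⟨_, rfl⟩
  obtain ⟨a4, ha4⟩ : ∃ a : Word, (u.reg .rsp - 2024) >>> 3 + 12583148 = a := ⟨_, rfl⟩
  obtain ⟨a5, ha5⟩ : ∃ a : Word, (u.reg .rsp - 2024) >>> 3 + 12583152 = a := ⟨_, rfl⟩
  obtain ⟨a6, ha6⟩ : ∃ a : Word, (u.reg .rsp - 2024) >>> 3 + 12583156 = a := ⟨_, rfl⟩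
  have hn1 := om_shaddr_toNat _ _ _ 0 ha1 (by omega) (by omega) (by decide) (by decide)
  have hn2 := om_shaddr_toNat _ _ _ 4 ha2 (by omega) (by omega) (by decide) (by decide)
  have hn3 := om_shaddr_toNat _ _ _ 232 ha3 (by omega) (by omega) (by decide) (by decide)
  have hn4 := om_shaddr_toNat _ _ _ 236 ha4 (by omega) (by omega) (by decide) (by decide)
  have hn5 := om_shaddr_toNat _ _ _ 240 ha5 (by omega) (by omega) (by decide) (by decide)
  have hn6 := om_shaddr_toNat _ _ _ 244 ha6 (by omega) (by omega) (by decide) (by decide)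
  obtain ⟨q, hq⟩ : ∃ q : Nat, ((u.reg .rsp).toNat - 2024) / 8 = q := ⟨_, rfl⟩
  have hqb : 917504 ≤ q ∧ q ≤ 1048576 := by omega
  rw [hq] at hn1 hn2 hn3 hn4 hn5 hn6
  clear hq
  have hal7 : (Word.part Width.w8 (8388608 : Word) &&& 7#8).toNat = 0 := by decide
  have hi := h_init others (((u.reg .rsp).toNat - 2024, Vorbis.Frames.stb_vorbis_open_memory) :: frames) 0x800000 0x400000
  have hL' : u.mem.readLE (u.reg .rcx + 8) 4 = 0x400000 := by
    have := hL
    unfold Mem.u32 at this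
    rw [← addr_add, addr_toNat] at this
    exact this
  u_walk hcode [hμ.vendor, ha1, ha2, ha3, ha4, ha5, ha6] until [Vorbis.L.stb_vorbis_open_memory.cut1] span [Vorbis.L.textLo, Vorbis.L.textHi] side (v_side)
  · v_inv
  · -- vorbis_init's precondition
    have hinv1 : ShadowInv others (((u.reg .rsp).toNat - 2024, Vorbis.Frames.stb_vorbis_open_memory) :: frames)
        ((s_119ac4.reg .rsp).toNat + 8) s_119ac4.mem := by
      rw [w_mem]
      have e : (s_119ac4.reg .rsp).toNat + 8 = (u.reg .rsp).toNat - 2024 := by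
        rw [w_rsp]
        u_omega
      rw [e]
      refine om_stack_store ?_ (u.reg .rsp) 2032 _ (by u_omega) (by omega) (by decide)
      exact om_prologue_a (sp := u.reg .rsp) (m := u.mem) ha1 ha2 ha3 ha4 ha5 ha6 hsh.inv he_align (by omega) (by omega)
        (u.reg .r13).toNat (u.reg .r12).toNat (u.reg .rbp).toNat (u.reg .rbx).toNat 1102416563 1183584 1153600
    refine ⟨⟨hinv1, hsh.offText⟩, ?_, ?_, ?_, ?_, ?_, ?_, ?_, ?_⟩
    · rw [w_rdi]
      have e : (u.reg .rsp - 1976).toNat = (u.reg .rsp).toNat - 1976 := by u_omega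
      rw [e]
      exact om_p_live others frames _ (by omega)
    · rw [w_rsi]
      exact halloc.1.mono (om_sub_frames others frames _ _)
    · left
      rw [w_rdi, w_rsi]
      simp only [Vorbis.Off.sizeof.stb_vorbis]
      u_omega
    · rw [w_rsi]
      unfold Mem.u64
      rw [addr_toNat, w_mem]
      u_frame hB'
    · rw [w_rsi]
      unfold Mem.u32
      rw [← addr_add, addr_toNat, w_mem]
      u_frame hL'
    · decide
    · decide
    · intro o ho
      obtain ⟨h1, h2, h3⟩ := hfree o ho
      exact ⟨h1, h2, by omega⟩
  · -- after vorbis_init (cut1, 0x119ac9)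
    v_after_call w_rsp_119ac4 w_mem_119ac4
    simp only [w_rdi_119ac4] at w_same
    obtain ⟨h0, harena, hun1⟩ := w_post
    have ep : (s_119ac4.reg .rdi).toNat = (u.reg .rsp).toNat - 1976 := by
      rw [w_rdi_119ac4]
      u_omega
    rw [ep] at h0 harena
    have eL : 4194304 / 8 * 8 = 4194304 := by decide
    rw [eL] at harena
    -- the stack slots the epilogue reads
    have hs0 : UInt64.ofNat (s_119ac4r.mem.readLE (u.reg .rsp) 8) = ret := by
      u_frame he_retAddr
    have hp1 : UInt64.ofNat (s_119ac4.mem.readLE (u.reg .rsp - 8) 8) = u.reg .r13 := by u_resolve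
    have hp2 : UInt64.ofNat (s_119ac4.mem.readLE (u.reg .rsp - 16) 8) = u.reg .r12 := by u_resolve
    have hp3 : UInt64.ofNat (s_119ac4.mem.readLE (u.reg .rsp - 24) 8) = u.reg .rbp := by u_resolve
    have hp4 : UInt64.ofNat (s_119ac4.mem.readLE (u.reg .rsp - 32) 8) = u.reg .rbx := by u_resolve
    rw [w_mem_119ac4] at hp1 hp2 hp3 hp4
    have q1 : UInt64.ofNat (s_119ac4r.mem.readLE (u.reg .rsp - 8) 8) = u.reg .r13 := by
      u_frame hp1
    have q2 : UInt64.ofNat (s_119ac4r.mem.readLE (u.reg .rsp - 16) 8) = u.reg .r12 := by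
      u_frame hp2
    have q3 : UInt64.ofNat (s_119ac4r.mem.readLE (u.reg .rsp - 24) 8) = u.reg .rbp := by
      u_frame hp3
    have q4 : UInt64.ofNat (s_119ac4r.mem.readLE (u.reg .rsp - 32) 8) = u.reg .rbx := by
      u_frame hp4
    have hsame : Mem.SameExcept [⟨(u.reg .rsp).toNat - 6208, (u.reg .rsp).toNat⟩, ⟨0x800000, 0xC00000⟩, ⟨0xC00000, 0xE00000⟩,
        ⟨0x121c00, 0x122000⟩, ⟨(u.reg .rdx).toNat, (u.reg .rdx).toNat + 4⟩] u.mem s_119ac4r.mem := by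
      u_same
    have hinvA : ShadowInv others (((u.reg .rsp).toNat - 2024, Vorbis.Frames.stb_vorbis_open_memory) :: frames)
        ((u.reg .rsp).toNat - 2024) s_119ac4r.mem := by
      refine ShadowInv.untouched ?_ hun1
      rw [w_mem_119ac4]
      refine om_stack_store ?_ (u.reg .rsp) 2032 _ (by u_omega) (by omega) (by decide)
      exact om_prologue_a (sp := u.reg .rsp) (m := u.mem) ha1 ha2 ha3 ha4 ha5 ha6 hsh.inv he_align (by omega) (by omega)
        (u.reg .r13).toNat (u.reg .r12).toNat (u.reg .rbp).toNat (u.reg .rbx).toNat 1102416563 1183584 1153600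
    refine hnext s_119ac4r ?_ w_r13 w_rbp hinvA h0 harena
    exact ⟨w_rip, w_rsp, w_rbx, w_r12, w_kept.get .r14 rfl, w_kept.get .r15 rfl, hs0, q1, q2, q3, q4, w_eq, w_inv, hsame⟩

/-- **Stage 5, machine part: from memcpy's return (cut4, 0x119b40) over `vorbis_pump_first_frame(f)` to the `ret`**, GIVEN the
decode-time invariant of the arena copy at cut4 (`hdi`: the pure composition SD.12 → P5 → `DecodeInv`, the one open obligation). -/
theorem om_stage5_walk (Lay : Layout) (hLay : Lay.hi = 0x1000000) (μ : Microarch) (hμ : UserX.MicroOK μ) (u₀ : State)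
    (hcode : HasCodeNat Lay u₀ Vorbis.L.stb_vorbis_open_memory.entry Vorbis.Code.code_stb_vorbis_open_memory.nat Vorbis.L.stb_vorbis_open_memory.size)
    (h_pump : ∀ (others : List Obj) (frames : List (Nat × FrameLayout)) (len : Nat) (A : Arena) (stored room : Int) (ysz : Nat → Nat), Calls Lay μ Vorbis.WayInv (Vorbis.conv u₀) Vorbis.L.vorbis_pump_first_frame.entry (Vorbis.Spec.vorbis_pump_first_frame.spec others frames len A stored room ysz))
    (h_store4 : Asan.SmallCheck Lay μ Vorbis.WayInv (Vorbis.CodeOK u₀) [.rax, .rcx, .rdx] 4 Vorbis.L.__asan_store4_noabort.entry)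
    (others : List Obj) (frames : List (Nat × FrameLayout)) (len : Nat) (u : State) (ret : Word)
    (he : AtEntry (conv u₀) Vorbis.L.stb_vorbis_open_memory.entry (Vorbis.Spec.stb_vorbis_open_memory.spec others frames len).frame ret u)
    (hpre : (Vorbis.Spec.stb_vorbis_open_memory.spec others frames len).pre u)
    (s : State) (hm : OmMid u₀ u ret Vorbis.L.stb_vorbis_open_memory.cut4 s)
    (fw : Word) (c_rbp : s.reg .rbp = fw) (others' : List Obj) (A' : Arena) (ysz : Nat → Nat)
    (hAB : A'.B = 0x800000) (hAL : A'.L = 0x400000)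
    (hinv' : ShadowInv others' (((u.reg .rsp).toNat - 2024, Vorbis.Frames.stb_vorbis_open_memory) :: frames) ((u.reg .rsp).toNat - 2024) s.mem)
    (hoff' : ∀ o, o ∈ others' → L.textHi ≤ o.base)
    (hdi : DecodeInv others' (((u.reg .rsp).toNat - 2024, Vorbis.Frames.stb_vorbis_open_memory) :: frames) len A' 0 0 ysz s.mem fw.toNat) :
    ReachVia Lay μ WayInv s (Returned (conv u₀) (Vorbis.Spec.stb_vorbis_open_memory.spec others frames len) u ret) := by
  have he' := he
  have hpre' := hpre
  v_entry he
  obtain ⟨hsh, hrdi, hrsi, hlen, herr, halloc, hapart, hB, hL, hfix, hfree, hconsts⟩ := hpre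
  have hwe : (u.reg .rsp).toNat + 8 ≤ (u.reg .rdx).toNat ∧ (u.reg .rdx).toNat + 4 ≤ 0x800000 := by
    have := herr.1.above hsh.inv
    have := herr.2
    omega
  have hpu := h_pump others' (((u.reg .rsp).toNat - 2024, Vorbis.Frames.stb_vorbis_open_memory) :: frames) len A' 0 0 ysz
  -- the present state
  have w_rip := hm.rip
  have c_rsp : s.reg .rsp = u.reg .rsp - 2024 := hm.rsp
  have c_rbx : s.reg .rbx = (u.reg .rsp - 2024) >>> 3 := hm.rbx
  have c_r12 : s.reg .r12 = u.reg .rdx := hm.r12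
  have w_kept : RegsKept [.rsp] s s := RegsKept.refl _ _
  have w_eq : Mem.EqOn Vorbis.L.textLo Vorbis.L.textHi u₀.mem s.mem := hm.code
  have hdf : s.flags .df = false := (show abiInv _ from hm.inv).1
  have hmx : s.mxcsr &&& 0x1F80 = 0x1F80 := (show abiInv _ from hm.inv).2
  have hsse := Vorbis.sseOK_of_abiInv hm.inv
  have c_same := hm.same
  have k0 := hm.k0
  have k1 := hm.k1
  have k2 := hm.k2
  have k3 := hm.k3
  have k4 := hm.k4
  u_walk hcode [hμ.vendor] until [Vorbis.L.stb_vorbis_open_memory.cut5] span [Vorbis.L.textLo, Vorbis.L.textHi] side (v_side)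
  · v_inv
  · -- vorbis_pump_first_frame's precondition: the frame boundary, carried over the pushed return address
    have e : (s_119b43.reg .rsp).toNat + 8 = (u.reg .rsp).toNat - 2024 := by
      rw [w_rsp]
      u_omega
    have hinvP : ShadowInv others' (((u.reg .rsp).toNat - 2024, Vorbis.Frames.stb_vorbis_open_memory) :: frames)
        ((u.reg .rsp).toNat - 2024) s_119b43.mem := by
      rw [w_mem]
      exact om_stack_store hinv' (u.reg .rsp) 2032 _ (by u_omega) (by omega) (by decide)
    refine ⟨⟨?_, hoff'⟩, ?_⟩
    · rw [e]
      exact hinvP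
    · rw [w_rdi]
      have hs1 : Mem.SameExcept [⟨(u.reg .rsp).toNat - 2032, (u.reg .rsp).toNat - 2024⟩] s.mem s_119b43.mem := by
        rw [w_mem]
        u_same
      refine hdi.carry hinv' ?_ hinvP
      refine AllKept.of_sameExcept hdi.ok hs1 ?_
      intro B hB w hw
      have h1 := hdi.offStack B hB
      have e1 : w = ⟨(u.reg .rsp).toNat - 2032, (u.reg .rsp).toNat - 2024⟩ := List.mem_singleton.mp hw
      subst e1
      simp only
      omega
  · -- after vorbis_pump_first_frame (cut5, 0x119b48)
    v_after_call w_rsp_119b43 w_mem_119b43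
    simp only [hAB, hAL] at w_same
    obtain ⟨hinvR, hdiR⟩ := w_post
    have ersp : (s_119b43r.reg .rsp).toNat = (u.reg .rsp).toNat - 2024 := by
      rw [w_rsp]
      u_omega
    rw [ersp] at hinvR
    rw [w_rdi_119b43] at hdiR
    have q0 : UInt64.ofNat (s_119b43r.mem.readLE (u.reg .rsp) 8) = ret := by
      u_frame k0
    have q1 : UInt64.ofNat (s_119b43r.mem.readLE (u.reg .rsp - 8) 8) = u.reg .r13 := by
      u_frame k1
    have q2 : UInt64.ofNat (s_119b43r.mem.readLE (u.reg .rsp - 16) 8) = u.reg .r12 := by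
      u_frame k2
    have q3 : UInt64.ofNat (s_119b43r.mem.readLE (u.reg .rsp - 24) 8) = u.reg .rbp := by
      u_frame k3
    have q4 : UInt64.ofNat (s_119b43r.mem.readLE (u.reg .rsp - 32) 8) = u.reg .rbx := by
      u_frame k4
    have hsame : Mem.SameExcept [⟨(u.reg .rsp).toNat - 6208, (u.reg .rsp).toNat⟩, ⟨0x800000, 0xC00000⟩, ⟨0xC00000, 0xE00000⟩,
        ⟨0x121c00, 0x122000⟩, ⟨(u.reg .rdx).toNat, (u.reg .rdx).toNat + 4⟩] u.mem s_119b43r.mem := by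
      u_same
    refine om_stage6 Lay hLay μ hμ u₀ hcode h_store4 others frames len u ret he' hpre' s_119b43r ?_ fw (by rw [w_kept .rbp rfl]; exact c_rbp) others' A' ysz hAB hAL
      hinvR hoff' hdiR
    refine ⟨w_rip, w_rsp, ?_, ?_, ?_, ?_, q0, q1, q2, q3, q4, w_eq, w_inv, hsame⟩
    · rw [w_kept .rbx rfl]
      exact c_rbx
    · rw [w_kept .r12 rfl]
      exact c_r12
    · rw [w_kept .r14 rfl]
      exact hm.r14
    · rw [w_kept .r15 rfl]
      exact hm.r15

/-- **The PURE part of the unit (no machine state): SD.12 → P5 → the decode-time invariant of the arena copy**, as a proposition;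
its proof is `om_pure` (Proof.lean). `spw` = the stack pointer at the function's entry, `p = spw − 1976` the frame object, `fw` = the
new block `f'`; `mem0` the memory at start_decoder's return (SD.12 = `StartDecoder.Done`), `m1` the memory at memcpy's entry
(vorbis_alloc's postcondition), `m2` the memory after memcpy (0x119b40, stb_vorbis_fixed.c:5142 `*f = p`). The route: NOT
`Real.P5.of_move` (`Move.off` is false of the machine memories around `call memcpy`), but the groups' two-address lemmas
(`ConfigOK.transfer`, `Bits.transfer`, `ArenaOK.transfer`, `Separated.transfer`, `readsArena_transfer`) from `(mem0, p)` to `(m2, f')`. -/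
def OmPure : Prop :=
  ∀ (frames' : List (Nat × FrameLayout)) (len : Nat) (spw fw : Word) (A : Arena × List Obj) (mem0 m1 m2 : Mem),
    len ≤ 0x1FF000 → 0x700000 + 6208 ≤ spw.toNat → spw.toNat + 8 ≤ 0x800000 → spw.toNat % 8 = 0 →
    Consts mem0 →
    (⟨0x800000, 0x400000, 0, 0x400000, [], []⟩ : Arena).Extends A.1 →
    StartDecoder.HandOK len (spw.toNat - 1976) frames' A →
    StartDecoder.Done len (spw.toNat - 1976) (Asan.Live (stackObjs frames' ++ A.2)) A mem0 →
    fw.toNat = 0x800000 + A.1.S + 32 →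
    A.1.Fits Off.sizeof.stb_vorbis →
    ArenaOK (A.1.pushSetup Off.sizeof.stb_vorbis) (A.1.newSetupObj Off.sizeof.stb_vorbis :: A.2) m1 (spw.toNat - 1976) →
    Mem.SameExcept [⟨spw.toNat - 6208, spw.toNat - 2024⟩, ⟨spw.toNat - 1976 + 8, spw.toNat - 1976 + 12⟩,
      ⟨spw.toNat - 1976 + 128, spw.toNat - 1976 + 132⟩, ⟨0xC00000, 0xE00000⟩] mem0 m1 →
    (∀ i, i < 1808 → m2.readLE (fw + UInt64.ofNat i) 1 = m1.readLE (spw - 1976 + UInt64.ofNat i) 1) →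
    Mem.SameExcept [⟨spw.toNat - 6208, spw.toNat - 2024⟩, ⟨fw.toNat, fw.toNat + 1808⟩] m1 m2 →
    ShadowInv (A.1.newSetupObj Off.sizeof.stb_vorbis :: A.2) frames' (spw.toNat - 2024) m2 →
    ∃ ysz : Nat → Nat,
      DecodeInv (A.1.newSetupObj Off.sizeof.stb_vorbis :: A.2) frames' len (A.1.pushSetup Off.sizeof.stb_vorbis) 0 0 ysz m2 fw.toNat

/-- **THE REDUCTION: the unit's contract follows from `OmPure`**: stages 1, 2, 3 (the failing arm), 4, 5, 6 composed; the pure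
transport (`h5`, proved as `om_pure` in Proof.lean) is used once, at cut4 (0x119b40, after memcpy). -/
theorem om_reduce (Lay : Layout) (hLay : Lay.hi = 0x1000000) (μ : Microarch) (hμ : UserX.MicroOK μ) (u₀ : State)
    (hcode : HasCodeNat Lay u₀ Vorbis.L.stb_vorbis_open_memory.entry Vorbis.Code.code_stb_vorbis_open_memory.nat Vorbis.L.stb_vorbis_open_memory.size)
    (h_init : ∀ (others : List Obj) (frames : List (Nat × FrameLayout)) (B len : Nat), Calls Lay μ Vorbis.WayInv (Vorbis.conv u₀) Vorbis.L.vorbis_init.entry (Vorbis.Spec.vorbis_init.spec others frames B len))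
    (h_sd : ∀ (len : Nat) (A0 : Arena × List Obj) (frames : List (Nat × FrameLayout)), Calls Lay μ Vorbis.WayInv (Vorbis.conv u₀) Vorbis.L.start_decoder.entry (Vorbis.Spec.start_decoder.spec len A0 frames))
    (h_alloc : ∀ (others : List Obj) (frames : List (Nat × FrameLayout)) (A : Arena), Calls Lay μ Vorbis.WayInv (Vorbis.conv u₀) Vorbis.L.vorbis_alloc.entry (Vorbis.Spec.vorbis_alloc.spec others frames A))
    (h_storeN : Calls Lay μ Vorbis.WayInv (Vorbis.conv u₀) Vorbis.L.__asan_storeN_noabort.entry Asan.checkNSpec)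
    (h_memcpy : ∀ (others : List Obj) (frames : List (Nat × FrameLayout)), Calls Lay μ Vorbis.WayInv (Vorbis.conv u₀) Vorbis.L.memcpy.entry (Vorbis.Spec.memcpy.spec others frames))
    (h_store4 : Asan.SmallCheck Lay μ Vorbis.WayInv (Vorbis.CodeOK u₀) [.rax, .rcx, .rdx] 4 Vorbis.L.__asan_store4_noabort.entry)
    (h_deinit : ∀ (others : List Obj) (frames : List (Nat × FrameLayout)) (Blk : Block → Prop), Calls Lay μ Vorbis.WayInv (Vorbis.conv u₀) Vorbis.L.vorbis_deinit.entry (Vorbis.Spec.vorbis_deinit.spec others frames Blk))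
    (h_pump : ∀ (others : List Obj) (frames : List (Nat × FrameLayout)) (len : Nat) (A : Arena) (stored room : Int) (ysz : Nat → Nat), Calls Lay μ Vorbis.WayInv (Vorbis.conv u₀) Vorbis.L.vorbis_pump_first_frame.entry (Vorbis.Spec.vorbis_pump_first_frame.spec others frames len A stored room ysz))
    (h5 : OmPure)
    (others : List Obj) (frames : List (Nat × FrameLayout)) (len : Nat) :
    Calls Lay μ Vorbis.WayInv (Vorbis.conv u₀) Vorbis.L.stb_vorbis_open_memory.entry (Vorbis.Spec.stb_vorbis_open_memory.spec others frames len) := by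
  intro u ret he hpre
  refine om_stage1 Lay hLay μ hμ u₀ hcode h_init others frames len u ret he hpre _ ?_
  intro s1 hm1 c_r13 c_rbp hinv h0 harena
  refine om_stage2 Lay hLay μ hμ u₀ hcode h_sd others frames len u ret he hpre _ ?_ s1 hm1 c_r13 c_rbp hinv h0 harena
  intro s2 hm2 haft
  obtain ⟨hcon, A, hext, hinvA, hoffA, hhandA, hcase⟩ := haft
  rcases hcase with ⟨hrax, hdone⟩ | ⟨hrax, hfail⟩
  · -- start_decoder returned 1
    refine om_stage4 Lay hLay μ hμ u₀ hcode h_alloc h_storeN h_memcpy others frames len u ret he hpre _ s2 hm2 A hext hinvA hoffA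
      hhandA hrax hdone ?_
    intro s' fw hm4 c_rbp' hfw hmem hinv3
    obtain ⟨m1, ⟨hfits, harena1⟩, hY, hcopy, hZ⟩ := hmem
    have he2 := he
    v_entry he2
    obtain ⟨ysz, hdi⟩ := h5 _ len (u.reg .rsp) fw A s2.mem m1 s'.mem hpre.2.2.2.1 (by omega) (by omega) he2_align hcon hext hhandA hdone
      hfw hfits harena1 hY hcopy hZ hinv3
    have hoff3 : ∀ o, o ∈ A.1.newSetupObj Off.sizeof.stb_vorbis :: A.2 → L.textHi ≤ o.base := by
      intro o ho
      rcases List.mem_cons.mp ho with rfl | hold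
      · have hAB : A.1.B = 0x800000 := hext.B
        simp only [Arena.newSetupObj, Arena.setupObj, hAB]
        have e : L.textHi = 0x119d40 := rfl
        omega
      · exact hoffA o hold
    have hAB' : (A.1.pushSetup Off.sizeof.stb_vorbis).B = 0x800000 := hext.B
    have hAL' : (A.1.pushSetup Off.sizeof.stb_vorbis).L = 0x400000 := hext.L
    exact om_stage5_walk Lay hLay μ hμ u₀ hcode h_pump h_store4 others frames len u ret he hpre s' hm4 fw c_rbp'
      (A.1.newSetupObj Off.sizeof.stb_vorbis :: A.2) (A.1.pushSetup Off.sizeof.stb_vorbis) ysz hAB' hAL' hinv3 hoff3 hdi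
  · -- start_decoder returned 0
    exact om_stage3_fail Lay hLay μ hμ u₀ hcode h_store4 h_deinit others frames len u ret he hpre s2 hm2 hcon A hext hinvA hoffA
      hhandA hrax hfail

/-- A one-byte little-endian read is the byte. -/
theorem om_readLE1 (m : Mem) (a : Word) : m.readLE a 1 = (m.read a).toNat := by
  simp only [Mem.readLE]
  omega

/-- **First step of `om_pure`: the CONFIG part of the invariant, transported in ONE step** from `(mem0, p)` (SD.12, over the arena's
own block predicate: `Done.config_arena`) to the arena copy `(m2, f')` over the run's block predicate of the extended arena —
no `Move`, no ghost memory, no `reblk`. `he` (returned too) serves `Bits.transfer`, `M7Range.transfer`, `W1.transfer`. -/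
theorem om_config_moved (frames' : List (Nat × FrameLayout)) (len : Nat) (spw fw : Word) (A : Arena × List Obj) (mem0 m1 m2 : Mem)
    (h1 : 0x700000 + 6208 ≤ spw.toNat) (h2 : spw.toNat + 8 ≤ 0x800000)
    (hext : (⟨0x800000, 0x400000, 0, 0x400000, [], []⟩ : Arena).Extends A.1)
    (hdone : StartDecoder.Done len (spw.toNat - 1976) (Asan.Live (stackObjs frames' ++ A.2)) A mem0)
    (hfw : fw.toNat = 0x800000 + A.1.S + 32)
    (hY : Mem.SameExcept [⟨spw.toNat - 6208, spw.toNat - 2024⟩, ⟨spw.toNat - 1976 + 8, spw.toNat - 1976 + 12⟩,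
      ⟨spw.toNat - 1976 + 128, spw.toNat - 1976 + 132⟩, ⟨0xC00000, 0xE00000⟩] mem0 m1)
    (hcopy : ∀ i, i < 1808 → m2.readLE (fw + UInt64.ofNat i) 1 = m1.readLE (spw - 1976 + UInt64.ofNat i) 1)
    (hZ : Mem.SameExcept [⟨spw.toNat - 6208, spw.toNat - 2024⟩, ⟨fw.toNat, fw.toNat + 1808⟩] m1 m2) :
    ObjEq Top.allocWins mem0 (spw.toNat - 1976) m2 fw.toNat ∧
      ConfigOK (RunBlk (A.1.pushSetup Off.sizeof.stb_vorbis) len) m2 fw.toNat := by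
  have hAB : A.1.B = 0x800000 := hext.B
  have hAL : A.1.L = 0x400000 := hext.L
  have hAR2 := hdone.arena.AR2
  have hcfgA := hdone.config_arena
  -- the windows of `*p` in mem0 read as those of `*f'` in m2
  have he : ObjEq Top.allocWins mem0 (spw.toNat - 1976) m2 fw.toNat := by
    intro w hw o ho1 ho2
    have ho : o < 1808 ∧ ¬ (8 ≤ o ∧ o < 12) ∧ ¬ (128 ≤ o ∧ o < 136) := by
      simp only [Top.allocWins, List.mem_cons, List.not_mem_nil, or_false] at hw
      rcases hw with rfl | rfl | rfl <;> simp only at ho1 ho2 <;> omega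
    have ea : addr (fw.toNat + o) = fw + UInt64.ofNat o := by
      rw [← addr_add, addr_toNat]
    have eb : addr (spw.toNat - 1976 + o) = spw - 1976 + UInt64.ofNat o := by
      rw [← addr_add]
      congr 1
      apply UInt64.toNat_inj.mp
      rw [toNat_addr _ (by omega)]
      u_omega
    have hc := hcopy o ho.1
    rw [om_readLE1, om_readLE1, ← ea, ← eb] at hc
    have hc' : m2.read (addr (fw.toNat + o)) = m1.read (addr (spw.toNat - 1976 + o)) := UInt8.toNat_inj.mp hc
    rw [hc']
    refine hY (addr (spw.toNat - 1976 + o)) ?_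
    intro w' hw'
    have et := toNat_addr (spw.toNat - 1976 + o) (by omega)
    simp only [List.mem_cons, List.not_mem_nil, or_false] at hw'
    rcases hw' with rfl | rfl | rfl | rfl <;> simp only [] <;> omega
  -- every block the configuration reads is a block of the arena at SD.12: kept by vorbis_alloc and by the copy
  have hk : ∀ B, ConfigOK.Reads mem0 (spw.toNat - 1976) B → B.Kept mem0 m2 := by
    intro B hR
    have hb := hdone.reads_arena hR
    have hr := hdone.arena.block_range hb
    have hl := le_r8 B.size
    refine Block.Kept.trans (Block.Kept.of_sameExcept hY ?_ (by omega)) (Block.Kept.of_sameExcept hZ ?_ (by omega))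
    · intro w hw
      simp only [List.mem_cons, List.not_mem_nil, or_false] at hw
      rcases hw with rfl | rfl | rfl | rfl <;> simp only [] <;> omega
    · intro w hw
      simp only [List.mem_cons, List.not_mem_nil, or_false] at hw
      rcases hw with rfl | rfl <;> simp only [] <;> omega
  refine ⟨he, hcfgA.transfer (he.sub (by decide)) hk ?_⟩
  intro B _ hB
  exact runBlk_setup (hB.mono (A.1.extends_pushSetup _))

/-- **Second step of `om_pure`: `VorbisOK` of the arena copy** over the run's block predicate of the extended arena, from
the transported CONFIG part (`om_config_moved`) and the mutable part (`Bits`, M7, W1) moved with the same `ObjEq`. -/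
theorem om_vorbis_moved (len : Nat) (p f : Nat) (A : Arena × List Obj) {Live : Nat → Prop} (mem0 m2 : Mem)
    (hext : (⟨0x800000, 0x400000, 0, 0x400000, [], []⟩ : Arena).Extends A.1)
    (hdone : StartDecoder.Done len p Live A mem0)
    (hf : f = 0x800000 + A.1.S + 32)
    (he : ObjEq Top.allocWins mem0 p m2 f)
    (hcfg : ConfigOK (RunBlk (A.1.pushSetup Off.sizeof.stb_vorbis) len) m2 f) :
    Real.VorbisOK len (RunBlk (A.1.pushSetup Off.sizeof.stb_vorbis) len) m2 f := by
  have hAB : A.1.B = 0x800000 := hext.B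
  have hAL : A.1.L = 0x400000 := hext.L
  have hAR2 := hdone.arena.AR2
  have hfin := hdone.final.fits
  rw [hdone.arena.AR5.setup, hdone.arena.AR5.temp] at hfin
  have hself : (A.1.pushSetup Off.sizeof.stb_vorbis).Blk (objBlock f) := by
    have := A.1.blk_pushSetup Off.sizeof.stb_vorbis
    rw [hAB] at this
    rw [hf]
    exact this
  have hb := hdone.vorbis.bits
  refine Real.VorbisOK.of_config hcfg ?_ (hdone.vorbis.buffers.M7.transfer (he.sub (by decide)))
    (hdone.vorbis.w1.transfer (he.sub (by decide)))
  refine hb.transfer (he.sub (by decide)) ⟨runBlk_setup hself, ?_⟩ ?_ ?_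
  · omega
  · simp only [voff]
    omega
  · exact runBlk_extra List.mem_cons_self

end Vorbis.Spec.stb_vorbis_open_memory
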